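/- GENERATED by mk_final_copies.py from the proof of the farm's unit `decode_residue.7b` (farm:decode_residue.7b.1: Lemmas.lean) as the
   re-elaboration sweep compiled it — do not edit. -/
import Asan.CheckWalk
import Vorbis.Spec.Units.decode_residue_7b

/-
  decode_residue.7b: DECODE_RAW of DECODE expansion #2 (0x10f36f … 0x10f40d), from `At17Mid1` to `At17Mid2`
  (Vorbis/Spec/DecodeResidue7.lean). The text is the walk `seg_b` of the worker of decode_residue.7 (attempt 1), which needed
  64M heartbeats and 7 minutes as ONE theorem; here it is CUT INTO ONE LEMMA PER STOP of the staged walk, so that the pieces are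
  elaborated side by side:

      seg_b          0x10f36f → the stop at `chk44` = 0x10f393 (the check of `f->acc`; the index of the fast table)
      stop_chk44     → the stop at `chk46` = 0x10f3c2 (the fast path), or the return of `codebook_decode_scalar_raw` at 0x10f4e2
                     (two check sites, the call's precondition)
      stop_chk46     the fast path → the stop at `chk47` = 0x10f3e8 (`codeword_lengths[x]`, `acc >>= len`)
      stop_chk47     → `chk48` = 0x10f40d on the two ends of the inline path (`valid_bits -= len`)
      end_negative   `valid_bits − len < 0`: `valid_bits := 0`, the result −1: `At17Mid2`
      end_fast       `valid_bits − len ≥ 0`: the result is the fast table's entry: `At17Mid2`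
      after_scalar_raw   0x10f4e2 → 0x10f40d: the callee's footprint and post, the result in the slot: `At17Mid2`

  THE HYPOTHESES OF A PIECE ARE THE PROOF STATE AT ITS STOP, as `trace_state` printed it there (the walker's facts `w_*` about the
  state at the stop, the branch facts `hbr_*`, the side facts `w_has_*` / `w_acc_*`, and what the pieces before it put into the
  context): the worker's text runs in exactly the context it was written in, and the piece before ends with `exact <piece> …`.
  THE THREE ENDS (`end_negative`, `end_fast`, `after_scalar_raw`) get only the 48–55 facts they use, not the 117–141 of the context:
  with all of them an end takes 150 s, most of it in the `omega` calls of `u_same` / `u_eqon` / `u_read`, which split on every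
  disjunctive where-fact in sight (`hclloc`, `hcloc`, `hobst`); with what it uses, 35–43 s. The whole file: 96 s and 12 GB on 8 cpus, 133 s on 3.
-/

open X86 X86.User Asan Vorbis Vorbis.Spec Vorbis.Spec.DecodeResidue

set_option maxRecDepth 4000
set_option maxHeartbeats 4000000
-- the pieces name every fact of the proof state at their stop; most are used by `omega` / the walker, not by name
set_option linter.unusedVariables false

namespace Vorbis.Spec.decode_residue_7b


/-! ### Pure lemmas for part B (0x10f36f … 0x10f40d): the index of the fast table, the sign of its entry, `Bits` after the inline DECODE -/

/-- A 32-bit value held zero-extended in a register, as a number. -/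
theorem ofBV32_nat (a : Nat) (ha : a < 2 ^ 32) : Word.ofBV (BitVec.ofNat 32 a) = UInt64.ofNat a := by
  apply UInt64.toNat_inj.mp
  unfold Word.ofBV
  simp only [UInt64.toNat_ofBitVec, BitVec.toNat_setWidth, BitVec.toNat_ofNat, UInt64.toNat_ofNat']
  omega

/-- `and ebx, 0x3ff ; add rbx, 0x18`: the index of `fast_huffman[acc & 1023]` in 2-byte units from the book's base. -/
theorem fast_index (a : Nat) (ha : a < 2 ^ 32) :
    Word.ofBV (BitVec.setWidth 64 (BitVec.ofNat 32 a &&& 1023#32)) + 24 = UInt64.ofNat ((a &&& 1023) + 24) := by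
  have hk := Vorbis.and_1023_lt a
  apply UInt64.toNat_inj.mp
  unfold Word.ofBV
  simp only [UInt64.toNat_ofBitVec, BitVec.toNat_setWidth, BitVec.toNat_and, BitVec.toNat_ofNat, UInt64.toNat_ofNat',
    UInt64.toNat_add, UInt64.toNat_ofNat]
  have e : a % 2 ^ 32 = a := Nat.mod_eq_of_lt ha
  rw [e]
  have e2 : (1023 : Nat) % 2 ^ 32 = 1023 := by decide
  rw [e2]
  omega

/-- `lea rdi, [r14 + rbx*2]`: the address of `c->fast_huffman[k]`. -/
theorem fast_addr (c k : Nat) (hc : c + 2120 ≤ 0xC00000) (hk : k < 1024) :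
    UInt64.ofNat c + UInt64.ofNat (k + 24) * 2 = UInt64.ofNat (c + 48 + 2 * k) := by
  apply UInt64.toNat_inj.mp
  u_omega

/-- `movzx ebx, word ; movsx eax, bx`: the sign of the result is the sign bit of the 16-bit table entry. -/
theorem fh_msb_bv (b : BitVec 16) :
    (BitVec.signExtend 32 (BitVec.setWidth 16 (BitVec.zeroExtend 32 b))).msb = b.msb := by
  bv_decide

/-- A non-negative table entry, sign-extended to 64 bits, is its zero extension. -/
theorem fh_sext64_bv (b : BitVec 16) (h : b.msb = false) :
    BitVec.signExtend 64 (BitVec.setWidth 16 (BitVec.zeroExtend 32 b)) = BitVec.zeroExtend 64 b := by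
  bv_decide

/-- A non-negative table entry, sign-extended to 32 bits, is its zero extension. -/
theorem fh_sext32_bv (b : BitVec 16) (h : b.msb = false) :
    BitVec.signExtend 32 (BitVec.setWidth 16 (BitVec.zeroExtend 32 b)) = BitVec.zeroExtend 32 b := by
  bv_decide

/-- The sign bit of a 16-bit number. -/
theorem msb16 (x : Nat) (hx : x < 65536) : (BitVec.ofNat 16 x).msb = decide (32768 ≤ x) := by
  rw [BitVec.msb_eq_decide]
  simp only [BitVec.toNat_ofNat]
  have e : x % 2 ^ 16 = x := Nat.mod_eq_of_lt hx
  rw [e]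

/-- The fast-table entry is negative: the `js` at 0x10f3a8 is taken. -/
theorem fh_neg (x : Nat) (hx : x < 65536)
    (h : (BitVec.signExtend 32 (BitVec.setWidth 16 (BitVec.zeroExtend 32 (BitVec.ofNat 16 x)))).msb = true) : 32768 ≤ x := by
  rw [fh_msb_bv, msb16 x hx] at h
  exact of_decide_eq_true h

/-- The fast-table entry is not negative. -/
theorem fh_pos (x : Nat) (hx : x < 65536)
    (h : (BitVec.signExtend 32 (BitVec.setWidth 16 (BitVec.zeroExtend 32 (BitVec.ofNat 16 x)))).msb = false) : x < 32768 := by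
  rw [fh_msb_bv, msb16 x hx] at h
  have := of_decide_eq_false h
  omega

/-- `movsx rbx, bx` of a non-negative entry. -/
theorem fh_word64 (x : Nat) (hx : x < 32768) :
    Word.ofBV (BitVec.signExtend 64 (BitVec.setWidth 16 (BitVec.zeroExtend 32 (BitVec.ofNat 16 x)))) = UInt64.ofNat x := by
  have hm : (BitVec.ofNat 16 x).msb = false := by
    rw [msb16 x (by omega)]
    exact decide_eq_false (by omega)
  rw [fh_sext64_bv _ hm]
  apply UInt64.toNat_inj.mp
  unfold Word.ofBV
  simp only [UInt64.toNat_ofBitVec, BitVec.toNat_setWidth, BitVec.truncate_eq_setWidth, BitVec.toNat_ofNat,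
    UInt64.toNat_ofNat']
  omega

/-- The value `mov [rbp-0xb8], eax` stores for a non-negative entry. -/
theorem fh_nat32 (x : Nat) (hx : x < 32768) :
    (BitVec.signExtend 32 (BitVec.setWidth 16 (BitVec.zeroExtend 32 (BitVec.ofNat 16 x)))).toNat = x := by
  have hm : (BitVec.ofNat 16 x).msb = false := by
    rw [msb16 x (by omega)]
    exact decide_eq_false (by omega)
  rw [fh_sext32_bv _ hm]
  simp only [BitVec.toNat_setWidth, BitVec.truncate_eq_setWidth, BitVec.toNat_ofNat]
  omega

/-- `movzx ecx, byte ; movzx ebx, cl`: the code length as a number. -/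
theorem len_word (ln : Nat) (h : ln < 256) :
    Word.ofBV (BitVec.zeroExtend 32 (BitVec.setWidth 8 (BitVec.zeroExtend 32 (BitVec.ofNat 8 ln)))) = UInt64.ofNat ln := by
  apply UInt64.toNat_inj.mp
  unfold Word.ofBV
  simp only [UInt64.toNat_ofBitVec, BitVec.toNat_setWidth, BitVec.truncate_eq_setWidth, BitVec.toNat_ofNat,
    UInt64.toNat_ofNat']
  omega

/-- **`Bits` and μ after the inline DECODE**: the memory agrees with the old one on `[f, f + 1764)` (everything `Bits` and μ read
except `valid_bits`), and the new `valid_bits` satisfies V1. -/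
theorem bits_tail {Blk : Block → Prop} {len : Nat} {m m' : Mem} {f : Nat} (h : Bits Blk len m f)
    (hE : Mem.EqOn f (f + 1764) m m')
    (hV : -1 ≤ stb_vorbis.valid_bits m' f ∧ stb_vorbis.valid_bits m' f ≤ 32) :
    Bits Blk len m' f ∧ mu m' f = mu m f := by
  have hr := h.OBR
  simp only [voff] at hr
  have e1 : stb_vorbis.stream_start m' f = stb_vorbis.stream_start m f := by
    simp only [vacc, voff]
    exact hE.u64 _ (by omega) (by omega) (by omega)
  have e2 : stb_vorbis.stream_end m' f = stb_vorbis.stream_end m f := by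
    simp only [vacc, voff]
    exact hE.u64 _ (by omega) (by omega) (by omega)
  have e3 : stb_vorbis.stream m' f = stb_vorbis.stream m f := by
    simp only [vacc, voff]
    exact hE.u64 _ (by omega) (by omega) (by omega)
  have e4 : stb_vorbis.segment_count m' f = stb_vorbis.segment_count m f := by
    simp only [vacc, voff]
    exact hE.i32 _ (by omega) (by omega) (by omega)
  have e5 : stb_vorbis.next_seg m' f = stb_vorbis.next_seg m f := by
    simp only [vacc, voff]
    exact hE.i32 _ (by omega) (by omega) (by omega)
  constructor
  · apply h.update e1 e2
    · rw [e3]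
      exact h.S3
    · rw [e4]
      exact h.N1
    · rw [e4, e5]
      exact h.N2
    · exact hV
  · exact mu_frame (by omega) (hE.mono (by omega) (by omega)) (hE.mono (by omega) (by omega))
      (hE.mono (by omega) (by omega)) (hE.mono (by omega) (by omega))

/-- `sub eax, ebx ; js` not taken: with `-1 ≤ valid_bits ≤ 32` and a code length below 256, the difference is in `[0, 32]`. -/
theorem vsub (a b : BitVec 32) (ha : -1 ≤ a.toInt ∧ a.toInt ≤ 32) (hb : b.toNat < 256) (hm : (a - b).msb = false) :
    -1 ≤ (a - b).toInt ∧ (a - b).toInt ≤ 32 := by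
  have eb : b.toInt = (b.toNat : Int) := by
    rw [BitVec.toInt_eq_toNat_cond]
    split <;> omega
  have e : (a - b).toInt = a.toInt - b.toInt := by
    rw [BitVec.toInt_sub]
    apply Int.bmod_eq_of_le <;> omega
  rw [BitVec.msb_eq_toInt] at hm
  have h0 := of_decide_eq_false hm
  omega

/-- The DECODE_RAW result predicate follows the memory as long as the struct at `c` reads the same. -/
theorem rawResult_kept {m m' : Mem} {c : Nat} {q : Int} (h : DecodeRawResult m c q) (hb : c + Off.sizeof.Codebook ≤ 2 ^ 64)
    (hs : (Block.mk c Off.sizeof.Codebook).Same m m') : DecodeRawResult m' c q := by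
  have sf := Codebook.SameFields.of_same hb hs
  have e : Codebook.N m' c = Codebook.N m c := by
    unfold Codebook.N
    rw [sf.sparse, sf.entries, sf.sorted_entries]
  unfold DecodeRawResult at h ⊢
  rw [e]
  exact h


/-- **After `codebook_decode_scalar_raw`** (0x10f4e2 … 0x10f40d): the callee's footprint and post, then
`mov [rbp-0xb8], eax ; jmp 10f409 ; lea rdi, [r14+0x1b]`: the result `q = (int) eax` is in the scratch slot: `At17Mid2`. -/
theorem after_scalar_raw
    (Lay : Layout)
    (hLay : Lay.hi = 16777216)
    (μ : Microarch)
    (hμ : UserX.MicroOK μ)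
    (u₀ : State)
    (hcode : HasCodeNat Lay u₀ L.decode_residue.entry Code.code_decode_residue.nat L.decode_residue.size)
    (g : G)
    (v s : State)
    (hm : At17Mid1 u₀ g v s)
    (he_align : UInt64.toNat (g.e.reg Reg.rsp) % 8 = 0)
    (he_room : 7340032 + 848 ≤ UInt64.toNat (g.e.reg Reg.rsp))
    (he_top : UInt64.toNat (g.e.reg Reg.rsp) + 8 ≤ 8388608)
    (he_stack : Lay.Has (g.e.reg Reg.rsp - 848) 856)
    (hobin : 1048576 ≤ UInt64.toNat (g.e.reg Reg.rdi) ∧ UInt64.toNat (g.e.reg Reg.rdi) + 1808 ≤ 12582912)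
    (hobst : UInt64.toNat (g.e.reg Reg.rdi) + 1808 ≤ 7340032 ∨ 8388608 ≤ UInt64.toNat (g.e.reg Reg.rdi))
    (ef : g.f = UInt64.toNat (g.e.reg Reg.rdi))
    (hs_rsp : s.reg Reg.rsp = g.e.reg Reg.rsp - 248)
    (hs_rbp : s.reg Reg.rbp = g.e.reg Reg.rsp - 8)
    (hs_r12 : s.reg Reg.r12 = UInt64.ofNat g.r)
    (hs_r13 : s.reg Reg.r13 = g.e.reg Reg.rdi)
    (hs_rdi : s.reg Reg.rdi = g.e.reg Reg.rdi + 1764)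
    (hdf : s.flags.get Flag.df = false)
    (hmx : s.mxcsr &&& 8064 = 8064)
    (hsse : SseOK s)
    (hwf : 1154368 ≤ UInt64.toNat (g.e.reg Reg.rdi))
    (c : Nat)
    (hs_r14 : s.reg Reg.r14 = UInt64.ofNat c)
    (ecv : Residue.cbk v.mem g.f g.r = c)
    (hcloc :
      1048576 ≤ c ∧
        c + 2120 ≤ 12582912 ∧
          (c + 2120 ≤ 7340032 ∨ 8388608 ≤ c) ∧
            (c + 2120 ≤ UInt64.toNat (g.e.reg Reg.rdi) ∨ UInt64.toNat (g.e.reg Reg.rdi) + 1808 ≤ c))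
    (acc : Nat)
    (hacclt : acc < 2 ^ 32)
    (s_10f36f : State)
    (x : Nat)
    (hxlt : x < 65536)
    (s_10f4dd : State)
    (w_rsi_10f4dd : s_10f4dd.reg Reg.rsi = UInt64.ofNat c)
    (w_rdi_10f4dd : s_10f4dd.reg Reg.rdi = g.e.reg Reg.rdi)
    (w_rbx_10f4dd : s_10f4dd.reg Reg.rbx = Word.ofBV (BitVec.zeroExtend 32 (BitVec.ofNat 16 x)))
    (w_r13_10f4dd : s_10f4dd.reg Reg.r13 = UInt64.ofNat acc)
    (w_rsp_10f4dd : s_10f4dd.reg Reg.rsp = g.e.reg Reg.rsp - 256)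
    (w_rax_10f4dd :
      s_10f4dd.reg Reg.rax =
        Word.ofBV (BitVec.signExtend 32 (BitVec.setWidth 16 (BitVec.zeroExtend 32 (BitVec.ofNat 16 x)))))
    (w_kept_10f4dd : RegsKept [Reg.rsi, Reg.rdi, Reg.rbx, Reg.r13, Reg.rsp, Reg.rax, Reg.rcx, Reg.rdx] s s_10f4dd)
    (w_mem_10f4dd :
      s_10f4dd.mem =
        ((((s.mem.writeLE (g.e.reg Reg.rsp - 256) 8 1110900).writeLE (g.e.reg Reg.rsp - 184) 8
                      (UInt64.toNat (g.e.reg Reg.rdi))).writeLE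
                  (g.e.reg Reg.rsp - 256) 8 1110936).writeLE
              (g.e.reg Reg.rsp - 192) 4
              (BitVec.signExtend 32 (BitVec.setWidth 16 (BitVec.zeroExtend 32 (BitVec.ofNat 16 x)))).toNat).writeLE
          (g.e.reg Reg.rsp - 256) 8 1111266)
    (w_mxcsr_10f4dd : s_10f4dd.mxcsr = s.mxcsr)
    (w_zmm_10f4dd : s_10f4dd.zmm = s_10f36f.zmm)
    (s_10f4ddr : State)
    (w_rip : s_10f4ddr.rip = 1111266)
    (w_rsp : s_10f4ddr.reg Reg.rsp = g.e.reg Reg.rsp - 248)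
    (w_kept :
      RegsKept
        [Reg.rsi, Reg.rdi, Reg.rbx, Reg.r13, Reg.rsp, Reg.rax, Reg.rcx, Reg.rdx, Reg.r8, Reg.r9, Reg.r10, Reg.r11, Reg.r16,
          Reg.r17, Reg.r18, Reg.r19, Reg.r20, Reg.r21, Reg.r22, Reg.r23, Reg.r24, Reg.r25, Reg.r26, Reg.r27, Reg.r28,
          Reg.r29, Reg.r30, Reg.r31]
        s s_10f4ddr)
    (w_rbx : s_10f4ddr.reg Reg.rbx = Word.ofBV (BitVec.zeroExtend 32 (BitVec.ofNat 16 x)))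
    (w_r13 : s_10f4ddr.reg Reg.r13 = UInt64.ofNat acc)
    (w_same :
      Mem.SameExcept ((codebook_decode_scalar_raw.spec g.others' g.frames' g.Blk g.len).footprint s_10f4dd) s_10f4dd.mem
        s_10f4ddr.mem)
    (w_code : (conv u₀).code.In s_10f4ddr.mem)
    (w_inv : (conv u₀).inv s_10f4ddr)
    (w_post : (codebook_decode_scalar_raw.spec g.others' g.frames' g.Blk g.len).post s_10f4dd s_10f4ddr) :
    ReachVia Lay μ WayInv s_10f4ddr fun s' => At17Mid2 u₀ g v s' := by
  have w_eq := Vorbis.conv_code_eqOn w_code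
  have w_df := (show X86.User.abiInv _ from w_inv).1
  have w_mx := (show X86.User.abiInv _ from w_inv).2
  have w_sse := Vorbis.sseOK_of_abiInv w_inv
  simp only [X86.User.Spec.footprint, vspec, w_rsp_10f4dd, w_rdi_10f4dd] at w_same
  have hpost : ScalarRawPost g.Blk g.len s_10f4dd s_10f4ddr := w_post
  have ersi : (s_10f4dd.reg .rsi).toNat = c := by
    rw [w_rsi_10f4dd]
    u_omega
  have hun1 : ShadowUntouched s.mem s_10f4dd.mem := by
    rw [w_mem_10f4dd]
    v_untouched
  have hEall : Mem.EqOn (g.e.reg .rdi).toNat ((g.e.reg .rdi).toNat + 1808) s.mem s_10f4dd.mem := by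
    rw [w_mem_10f4dd]
    u_eqon
  have hEc1 : Mem.EqOn c (c + 2120) s.mem s_10f4dd.mem := by
    rw [w_mem_10f4dd]
    u_eqon
  have hmuN : mu s_10f4dd.mem g.f = mu s.mem g.f := mu_frame_obj (by rw [ef]; omega) hEall
  have hp1 : UInt64.ofNat (s_10f4dd.mem.readLE (g.e.reg .rsp - 184) 8) = g.e.reg .rdi := by
    have h1 : s_10f4dd.mem.readLE (g.e.reg .rsp - 184) 8 = (g.e.reg .rdi).toNat := by
      rw [w_mem_10f4dd]
      u_read
    rw [h1]
    exact UInt64.ofNat_toNat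
  have hs1 : UInt64.ofNat (s_10f4ddr.mem.readLE (g.e.reg .rsp - 184) 8) = g.e.reg .rdi := by
    u_frame hp1
  clear hp1
  rw [w_mem_10f4dd] at w_same
  have hsame' : Mem.SameExcept
      [⟨(g.e.reg .rsp).toNat - 848, (g.e.reg .rsp).toNat - 248⟩,
       ⟨(g.e.reg .rsp).toNat - 192, (g.e.reg .rsp).toNat - 176⟩,
       ⟨(g.e.reg .rsp).toNat - 160, (g.e.reg .rsp).toNat - 156⟩,
       ⟨(g.e.reg .rdi).toNat + 48, (g.e.reg .rdi).toNat + 56⟩, ⟨(g.e.reg .rdi).toNat + 84, (g.e.reg .rdi).toNat + 96⟩,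
       ⟨(g.e.reg .rdi).toNat + 136, (g.e.reg .rdi).toNat + 144⟩,
       ⟨(g.e.reg .rdi).toNat + 1484, (g.e.reg .rdi).toNat + 1749⟩,
       ⟨(g.e.reg .rdi).toNat + 1752, (g.e.reg .rdi).toNat + 1784⟩] s.mem s_10f4ddr.mem := by
    u_same
  have hEc : Mem.EqOn c (c + 2120) s_10f4dd.mem s_10f4ddr.mem := by
    have h0 : Mem.EqOn c (c + 2120) s.mem s_10f4ddr.mem := by
      apply hsame'.eqOn
      intro w hw
      simp only [List.mem_cons, List.mem_nil_iff, or_false] at hw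
      rcases hw with rfl | rfl | rfl | rfl | rfl | rfl | rfl | rfl <;> simp only [] <;> omega
    exact Mem.EqOn.trans hEc1.symm h0
  have hunr : ShadowUntouched s.mem s_10f4ddr.mem := Mem.EqOn.trans hun1 hpost.untouched
  have hbr : Bits g.Blk g.len s_10f4ddr.mem g.f := by
    have h0 := hpost.reader.bits
    rw [w_rdi_10f4dd] at h0
    exact h0
  have hmur : mu s_10f4ddr.mem g.f ≤ mu v.mem g.f := by
    have h0 := hpost.reader.mu_le
    rw [w_rdi_10f4dd] at h0
    have h1 := hm.mu_le
    rw [ef] at hmuN h1 ⊢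
    omega
  have hres : DecodeRawResult s_10f4ddr.mem c (argInt (s_10f4ddr.reg .rax)) := by
    have h0 := hpost.result
    rw [ersi] at h0
    exact rawResult_kept h0 (by simp only [voff]; omega) hEc
  have hrbp : s_10f4ddr.reg .rbp = g.e.reg .rsp - 8 := (w_kept.get .rbp rfl).trans hs_rbp
  obtain ⟨z, w_rax⟩ : ∃ z, s_10f4ddr.reg .rax = z := ⟨_, rfl⟩
  rw [w_rax] at hres
  u_walk hcode [hμ.vendor] until [Vorbis.L.decode_residue.chk48] span [Vorbis.L.textLo, Vorbis.L.textHi] side (v_side)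
  -- 0x10f40d on the path through the call: the result `q = (int) eax` is in the scratch slot
  have hsame2 : Mem.SameExcept [⟨(g.e.reg .rsp).toNat - 192, (g.e.reg .rsp).toNat - 188⟩] s_10f4ddr.mem s_10f409.mem := by
    rw [w_mem]
    apply Mem.SameExcept.writeLE
    · u_omega
    · exact ⟨_, List.mem_cons_self, by simp only []; u_omega, by simp only []; u_omega⟩
  obtain ⟨hbf, hmuf⟩ := Vorbis.Spec.Reader.reader_of_window hbr hsame2 (by rw [ef]; omega)
  have hfrf : UInt64.ofNat (s_10f409.mem.readLE (g.e.reg .rsp - 184) 8) = g.e.reg .rdi := by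
    rw [hsame2.readLE (g.e.reg .rsp - 184) 8 (by u_omega) ?_]
    · exact hs1
    · intro w hw
      have e1 : w = ⟨(g.e.reg .rsp).toNat - 192, (g.e.reg .rsp).toNat - 188⟩ := List.mem_singleton.mp hw
      subst e1
      simp only
      u_omega
  have hEc2 : Mem.EqOn c (c + 2120) s_10f4ddr.mem s_10f409.mem := by
    apply hsame2.eqOn
    intro w hw
    have e1 : w = ⟨(g.e.reg .rsp).toNat - 192, (g.e.reg .rsp).toNat - 188⟩ := List.mem_singleton.mp hw
    subst e1
    simp only
    omega
  have hun2 : ShadowUntouched s_10f4ddr.mem s_10f409.mem := by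
    apply hsame2.eqOn
    intro w hw
    have e1 : w = ⟨(g.e.reg .rsp).toNat - 192, (g.e.reg .rsp).toNat - 188⟩ := List.mem_singleton.mp hw
    subst e1
    simp only
    omega
  have hsame3 : Mem.SameExcept
      [⟨(g.e.reg .rsp).toNat - 848, (g.e.reg .rsp).toNat - 248⟩,
       ⟨(g.e.reg .rsp).toNat - 192, (g.e.reg .rsp).toNat - 176⟩,
       ⟨(g.e.reg .rsp).toNat - 160, (g.e.reg .rsp).toNat - 156⟩,
       ⟨(g.e.reg .rdi).toNat + 48, (g.e.reg .rdi).toNat + 56⟩, ⟨(g.e.reg .rdi).toNat + 84, (g.e.reg .rdi).toNat + 96⟩,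
       ⟨(g.e.reg .rdi).toNat + 136, (g.e.reg .rdi).toNat + 144⟩,
       ⟨(g.e.reg .rdi).toNat + 1484, (g.e.reg .rdi).toNat + 1749⟩,
       ⟨(g.e.reg .rdi).toNat + 1752, (g.e.reg .rdi).toNat + 1784⟩] s.mem s_10f409.mem := by
    rw [w_mem]
    apply hsame'.step_writeLE
    · u_omega
    · exact ⟨_, List.mem_cons_of_mem _ List.mem_cons_self, by simp only []; u_omega, by simp only []; u_omega⟩
  have hq : (argInt z % 2 ^ 32).toNat = z.toNat % 2 ^ 32 := by
    rw [argInt_def]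
    have hlt : z.toNat % 2 ^ 32 < 2 ^ 32 := Nat.mod_lt _ (by decide)
    rcases sint32_cases (z.toNat % 2 ^ 32) with h | h <;> omega
  have hrd : s_10f409.mem.readLE (g.e.reg .rsp - 192) 4 = z.toNat % 2 ^ 32 := by
    rw [w_mem, Mem.readLE_writeLE_same _ _ _ _ (by decide), Vorbis.toNat_part32]
    have hlt : z.toNat % 2 ^ 32 < 2 ^ 32 := Nat.mod_lt _ (by decide)
    omega
  refine ReachVia.done ⟨w_rip, w_rsp, (w_kept.get .rbp rfl).trans hs_rbp, (w_kept.get .r12 rfl).trans hs_r12, ?_,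
    (w_kept.get .r15 rfl).trans hm.r15, ?_, w_eq, ?_, hfrf, ⟨argInt z, ?_, ?_⟩, hm.same.trans hsame3,
    Mem.EqOn.trans hm.untouched (Mem.EqOn.trans hunr hun2), hbf, ?_⟩
  · rw [ecv]
    exact (w_kept.get .r14 rfl).trans hs_r14
  · rw [ecv]
    exact w_rdi
  · v_inv
  · rw [ecv]
    exact rawResult_kept hres (by simp only [voff]; omega) hEc2
  · rw [hq]
    exact hrd
  · rw [hmuf]
    exact hmur

/-- **The inline path, `valid_bits − len ≥ 0`** (0x10f403 not taken … 0x10f40d): the result is the fast table's entry `x`;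
`Bits` after the two stores into `*f` by `bits_tail`: `At17Mid2`. -/
theorem end_fast
    (Lay : Layout)
    (μ : Microarch)
    (u₀ : State)
    (g : G)
    (v s : State)
    (hm : At17Mid1 u₀ g v s)
    (he_align : UInt64.toNat (g.e.reg Reg.rsp) % 8 = 0)
    (he_room : 7340032 + 848 ≤ UInt64.toNat (g.e.reg Reg.rsp))
    (he_top : UInt64.toNat (g.e.reg Reg.rsp) + 8 ≤ 8388608)
    (hobin : 1048576 ≤ UInt64.toNat (g.e.reg Reg.rdi) ∧ UInt64.toNat (g.e.reg Reg.rdi) + 1808 ≤ 12582912)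
    (hobst : UInt64.toNat (g.e.reg Reg.rdi) + 1808 ≤ 7340032 ∨ 8388608 ≤ UInt64.toNat (g.e.reg Reg.rdi))
    (ef : g.f = UInt64.toNat (g.e.reg Reg.rdi))
    (hs_rsp : s.reg Reg.rsp = g.e.reg Reg.rsp - 248)
    (hs_rbp : s.reg Reg.rbp = g.e.reg Reg.rsp - 8)
    (hs_r12 : s.reg Reg.r12 = UInt64.ofNat g.r)
    (hdf : s.flags.get Flag.df = false)
    (hmx : s.mxcsr &&& 8064 = 8064)
    (hwf : 1154368 ≤ UInt64.toNat (g.e.reg Reg.rdi))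
    (hbits : Bits g.Blk g.len s.mem g.f)
    (c : Nat)
    (hs_r14 : s.reg Reg.r14 = UInt64.ofNat c)
    (ecv : Residue.cbk v.mem g.f g.r = c)
    (hcbok : CodebookOK g.Blk s.mem c)
    (hcloc :
      1048576 ≤ c ∧
        c + 2120 ≤ 12582912 ∧
          (c + 2120 ≤ 7340032 ∨ 8388608 ≤ c) ∧
            (c + 2120 ≤ UInt64.toNat (g.e.reg Reg.rdi) ∨ UInt64.toNat (g.e.reg Reg.rdi) + 1808 ≤ c))
    (s_10f36f : State)
    (k : Nat)
    (hklt : k < 1024)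
    (x : Nat)
    (hxlt : x < 65536)
    (hxpos : x < 32768)
    (hfh0 : Codebook.fast_huffman s.mem c k = ↑x)
    (ln : Nat)
    (hlnlt : ln < 256)
    (s_10f3e1 : State)
    (accn : Nat)
    (hdf3 : s_10f3e1.flags.get Flag.df = false)
    (vb : Nat)
    (hvb : s.mem.u32 (g.f + 1768) = vb)
    (hvblt : vb < 2 ^ 32)
    (s_10f3e8r : State)
    (w_df_10f3e8 : s_10f3e8r.flags.get Flag.df = false)
    (hbr_10f403 : (BitVec.ofNat 32 vb - Word.part Width.w32 (UInt64.ofNat ln)).msb = false)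
    (s_10f409 : State)
    (w_rip : s_10f409.rip = 1111053)
    (w_rdi : s_10f409.reg Reg.rdi = UInt64.ofNat c + 27)
    (w_rbx : s_10f409.reg Reg.rbx = UInt64.ofNat ln)
    (w_r13 : s_10f409.reg Reg.r13 = g.e.reg Reg.rdi)
    (w_rsp : s_10f409.reg Reg.rsp = g.e.reg Reg.rsp - 248)
    (w_rax : s_10f409.reg Reg.rax = Word.ofBV (BitVec.ofNat 32 vb - Word.part Width.w32 (UInt64.ofNat ln)))
    (w_kept : RegsKept [Reg.rdi, Reg.rbx, Reg.r13, Reg.rsp, Reg.rax, Reg.rcx, Reg.rdx] s s_10f409)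
    (w_mem :
      s_10f409.mem =
        (((((((((s.mem.writeLE (g.e.reg Reg.rsp - 256) 8 1110900).writeLE (g.e.reg Reg.rsp - 184) 8
                                          (UInt64.toNat (g.e.reg Reg.rdi))).writeLE
                                      (g.e.reg Reg.rsp - 256) 8 1110936).writeLE
                                  (g.e.reg Reg.rsp - 192) 4 x).writeLE
                              (g.e.reg Reg.rsp - 256) 8 1110967).writeLE
                          (g.e.reg Reg.rsp - 256) 8 1110983).writeLE
                      (g.e.reg Reg.rdi + 1764) 4 accn).writeLE
                  (g.e.reg Reg.rsp - 256) 8 1111021).writeLE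
              (g.e.reg Reg.rsp - 160) 4 (BitVec.ofNat 32 vb).toNat).writeLE
          (g.e.reg Reg.rdi + 1768) 4 (BitVec.ofNat 32 vb - Word.part Width.w32 (UInt64.ofNat ln)).toNat)
    (w_eq : Mem.EqOn 1048576 1154368 u₀.mem s_10f409.mem)
    (w_flags :
      s_10f409.flags =
        s_10f3e8r.flags.setStatus (Alu.sub (BitVec.ofNat 32 vb) (Word.part Width.w32 (UInt64.ofNat ln))).flags)
    (w_mxcsr : s_10f409.mxcsr = s.mxcsr)
    (w_zmm : s_10f409.zmm = s_10f36f.zmm) :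
    ReachVia Lay μ WayInv s_10f409 fun s' => At17Mid2 u₀ g v s' := by
  have hE : Mem.EqOn (g.e.reg .rdi).toNat ((g.e.reg .rdi).toNat + 1764) s.mem s_10f409.mem := by
    u_memnorm
    u_eqon
  have hEc : Mem.EqOn c (c + 2120) s.mem s_10f409.mem := by
    u_memnorm
    u_eqon
  have hsame' : Mem.SameExcept
      [⟨(g.e.reg .rsp).toNat - 848, (g.e.reg .rsp).toNat - 248⟩,
       ⟨(g.e.reg .rsp).toNat - 192, (g.e.reg .rsp).toNat - 176⟩,
       ⟨(g.e.reg .rsp).toNat - 160, (g.e.reg .rsp).toNat - 156⟩,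
       ⟨(g.e.reg .rdi).toNat + 48, (g.e.reg .rdi).toNat + 56⟩, ⟨(g.e.reg .rdi).toNat + 84, (g.e.reg .rdi).toNat + 96⟩,
       ⟨(g.e.reg .rdi).toNat + 136, (g.e.reg .rdi).toNat + 144⟩,
       ⟨(g.e.reg .rdi).toNat + 1484, (g.e.reg .rdi).toNat + 1749⟩,
       ⟨(g.e.reg .rdi).toNat + 1752, (g.e.reg .rdi).toNat + 1784⟩] s.mem s_10f409.mem := by
    rw [w_mem]
    u_same
  have hun' : ShadowUntouched s.mem s_10f409.mem := by v_untouched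
  have hfrf : UInt64.ofNat (s_10f409.mem.readLE (g.e.reg .rsp - 184) 8) = g.e.reg .rdi := by
    have h1 : s_10f409.mem.readLE (g.e.reg .rsp - 184) 8 = (g.e.reg .rdi).toNat := by
      rw [w_mem]
      u_read
    rw [h1]
    exact UInt64.ofNat_toNat
  have ea : g.e.reg .rdi + 1768 = addr (g.f + 1768) := by
    rw [ef, ← addr_add_lit, addr_toNat]
  have hV1 := hbits.V1
  have hvb0 : stb_vorbis.valid_bits s.mem g.f = (BitVec.ofNat 32 vb).toInt := by
    rw [Vorbis.toInt_ofNat32 vb hvblt, ← hvb]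
    simp only [vacc, voff]
    rfl
  rw [hvb0] at hV1
  have hlnb : (Word.part Width.w32 (UInt64.ofNat ln)).toNat < 256 := by
    rw [Vorbis.toNat_part32]
    u_omega
  have hVn := vsub _ _ hV1 hlnb hbr_10f403
  have hvbf : stb_vorbis.valid_bits s_10f409.mem g.f =
      (BitVec.ofNat 32 vb - Word.part Width.w32 (UInt64.ofNat ln)).toInt := by
    rw [w_mem, ea]
    simp only [vacc, voff]
    exact Mem.i32_writeLE_same_bv _ _ _
  obtain ⟨hbf, hmuf⟩ := bits_tail hbits hE (by rw [hvbf]; exact hVn)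
  refine ReachVia.done ⟨w_rip, w_rsp, (w_kept.get .rbp rfl).trans hs_rbp, (w_kept.get .r12 rfl).trans hs_r12, ?_,
    (w_kept.get .r15 rfl).trans hm.r15, ?_, w_eq, ?_, hfrf, ⟨(x : Int), ?_, ?_⟩, hm.same.trans hsame',
    Mem.EqOn.trans hm.untouched hun', hbf, ?_⟩
  · rw [ecv]
    exact (w_kept.get .r14 rfl).trans hs_r14
  · rw [ecv]
    exact w_rdi
  · v_inv
  · rw [ecv]
    have h0 := hcbok.decodeRaw_fast k hklt
    rw [hfh0] at h0
    exact rawResult_kept h0 (by simp only [voff]; omega) hEc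
  · have e : ((x : Int) % 2 ^ 32).toNat = x := by omega
    rw [e, w_mem]
    u_read
  · rw [hmuf]
    exact hm.mu_le

/-- **The inline path, `valid_bits − len < 0`** (0x10f4b9 … 0x10f4ce, 0x10f409): `valid_bits := 0`, the result is −1:
`At17Mid2`. -/
theorem end_negative
    (Lay : Layout)
    (μ : Microarch)
    (u₀ : State)
    (g : G)
    (v s : State)
    (hm : At17Mid1 u₀ g v s)
    (he_align : UInt64.toNat (g.e.reg Reg.rsp) % 8 = 0)
    (he_room : 7340032 + 848 ≤ UInt64.toNat (g.e.reg Reg.rsp))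
    (he_top : UInt64.toNat (g.e.reg Reg.rsp) + 8 ≤ 8388608)
    (hobin : 1048576 ≤ UInt64.toNat (g.e.reg Reg.rdi) ∧ UInt64.toNat (g.e.reg Reg.rdi) + 1808 ≤ 12582912)
    (hobst : UInt64.toNat (g.e.reg Reg.rdi) + 1808 ≤ 7340032 ∨ 8388608 ≤ UInt64.toNat (g.e.reg Reg.rdi))
    (ef : g.f = UInt64.toNat (g.e.reg Reg.rdi))
    (hs_rsp : s.reg Reg.rsp = g.e.reg Reg.rsp - 248)
    (hs_rbp : s.reg Reg.rbp = g.e.reg Reg.rsp - 8)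
    (hs_r12 : s.reg Reg.r12 = UInt64.ofNat g.r)
    (hdf : s.flags.get Flag.df = false)
    (hmx : s.mxcsr &&& 8064 = 8064)
    (hwf : 1154368 ≤ UInt64.toNat (g.e.reg Reg.rdi))
    (hbits : Bits g.Blk g.len s.mem g.f)
    (c : Nat)
    (hs_r14 : s.reg Reg.r14 = UInt64.ofNat c)
    (ecv : Residue.cbk v.mem g.f g.r = c)
    (hcloc :
      1048576 ≤ c ∧
        c + 2120 ≤ 12582912 ∧
          (c + 2120 ≤ 7340032 ∨ 8388608 ≤ c) ∧
            (c + 2120 ≤ UInt64.toNat (g.e.reg Reg.rdi) ∨ UInt64.toNat (g.e.reg Reg.rdi) + 1808 ≤ c))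
    (s_10f36f : State)
    (x : Nat)
    (ln : Nat)
    (hlnlt : ln < 256)
    (s_10f3e1 : State)
    (accn : Nat)
    (hdf3 : s_10f3e1.flags.get Flag.df = false)
    (vb : Nat)
    (hvblt : vb < 2 ^ 32)
    (s_10f3e8r : State)
    (w_df_10f3e8 : s_10f3e8r.flags.get Flag.df = false)
    (hbr_10f403 : (BitVec.ofNat 32 vb - Word.part Width.w32 (UInt64.ofNat ln)).msb = true)
    (s_10f409 : State)
    (w_rip : s_10f409.rip = 1111053)
    (w_rdi : s_10f409.reg Reg.rdi = UInt64.ofNat c + 27)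
    (w_rbx : s_10f409.reg Reg.rbx = UInt64.ofNat ln)
    (w_r13 : s_10f409.reg Reg.r13 = g.e.reg Reg.rdi)
    (w_rsp : s_10f409.reg Reg.rsp = g.e.reg Reg.rsp - 248)
    (w_rax : s_10f409.reg Reg.rax = Word.ofBV (BitVec.ofNat 32 vb - Word.part Width.w32 (UInt64.ofNat ln)))
    (w_kept : RegsKept [Reg.rdi, Reg.rbx, Reg.r13, Reg.rsp, Reg.rax, Reg.rcx, Reg.rdx] s s_10f409)
    (w_mem :
      s_10f409.mem =
        ((((((((((s.mem.writeLE (g.e.reg Reg.rsp - 256) 8 1110900).writeLE (g.e.reg Reg.rsp - 184) 8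
                                              (UInt64.toNat (g.e.reg Reg.rdi))).writeLE
                                          (g.e.reg Reg.rsp - 256) 8 1110936).writeLE
                                      (g.e.reg Reg.rsp - 192) 4 x).writeLE
                                  (g.e.reg Reg.rsp - 256) 8 1110967).writeLE
                              (g.e.reg Reg.rsp - 256) 8 1110983).writeLE
                          (g.e.reg Reg.rdi + 1764) 4 accn).writeLE
                      (g.e.reg Reg.rsp - 256) 8 1111021).writeLE
                  (g.e.reg Reg.rsp - 160) 4 (BitVec.ofNat 32 vb).toNat).writeLE
              (g.e.reg Reg.rdi + 1768) 4 0).writeLE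
          (g.e.reg Reg.rsp - 192) 4 4294967295)
    (w_eq : Mem.EqOn 1048576 1154368 u₀.mem s_10f409.mem)
    (w_flags :
      s_10f409.flags =
        s_10f3e8r.flags.setStatus (Alu.sub (BitVec.ofNat 32 vb) (Word.part Width.w32 (UInt64.ofNat ln))).flags)
    (w_mxcsr : s_10f409.mxcsr = s.mxcsr)
    (w_zmm : s_10f409.zmm = s_10f36f.zmm) :
    ReachVia Lay μ WayInv s_10f409 fun s' => At17Mid2 u₀ g v s' := by
  have hE : Mem.EqOn (g.e.reg .rdi).toNat ((g.e.reg .rdi).toNat + 1764) s.mem s_10f409.mem := by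
    u_memnorm
    u_eqon
  have hEc : Mem.EqOn c (c + 2120) s.mem s_10f409.mem := by
    u_memnorm
    u_eqon
  have hsame' : Mem.SameExcept
      [⟨(g.e.reg .rsp).toNat - 848, (g.e.reg .rsp).toNat - 248⟩,
       ⟨(g.e.reg .rsp).toNat - 192, (g.e.reg .rsp).toNat - 176⟩,
       ⟨(g.e.reg .rsp).toNat - 160, (g.e.reg .rsp).toNat - 156⟩,
       ⟨(g.e.reg .rdi).toNat + 48, (g.e.reg .rdi).toNat + 56⟩, ⟨(g.e.reg .rdi).toNat + 84, (g.e.reg .rdi).toNat + 96⟩,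
       ⟨(g.e.reg .rdi).toNat + 136, (g.e.reg .rdi).toNat + 144⟩,
       ⟨(g.e.reg .rdi).toNat + 1484, (g.e.reg .rdi).toNat + 1749⟩,
       ⟨(g.e.reg .rdi).toNat + 1752, (g.e.reg .rdi).toNat + 1784⟩] s.mem s_10f409.mem := by
    rw [w_mem]
    u_same
  have hun' : ShadowUntouched s.mem s_10f409.mem := by v_untouched
  have hfrf : UInt64.ofNat (s_10f409.mem.readLE (g.e.reg .rsp - 184) 8) = g.e.reg .rdi := by
    have h1 : s_10f409.mem.readLE (g.e.reg .rsp - 184) 8 = (g.e.reg .rdi).toNat := by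
      rw [w_mem]
      u_read
    rw [h1]
    exact UInt64.ofNat_toNat
  have ea : g.e.reg .rdi + 1768 = addr (g.f + 1768) := by
    rw [ef, ← addr_add_lit, addr_toNat]
  have hvbf : stb_vorbis.valid_bits s_10f409.mem g.f = 0 := by
    have hrd : s_10f409.mem.readLE (g.e.reg .rdi + 1768) 4 = 0 := by
      rw [w_mem]
      u_read
    rw [ea] at hrd
    simp only [vacc, voff]
    unfold Mem.i32 Mem.u32
    rw [hrd]
    rfl
  obtain ⟨hbf, hmuf⟩ := bits_tail hbits hE (by rw [hvbf]; omega)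
  refine ReachVia.done ⟨w_rip, w_rsp, (w_kept.get .rbp rfl).trans hs_rbp, (w_kept.get .r12 rfl).trans hs_r12, ?_,
    (w_kept.get .r15 rfl).trans hm.r15, ?_, w_eq, ?_, hfrf, ⟨-1, ?_, ?_⟩, hm.same.trans hsame',
    Mem.EqOn.trans hm.untouched hun', hbf, ?_⟩
  · rw [ecv]
    exact (w_kept.get .r14 rfl).trans hs_r14
  · rw [ecv]
    exact w_rdi
  · v_inv
  · rw [ecv]
    exact Or.inl rfl
  · rw [w_mem]
    u_read
  · rw [hmuf]
    exact hm.mu_le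

/-- **From the stop at `chk47`** (0x10f3e8, the check of `f->valid_bits`): the registers as numbers (`accn = acc >> len`),
`valid_bits -= len` and the sign test, to `chk48` on both ends. -/
theorem stop_chk47
    (Lay : Layout)
    (hLay : Lay.hi = 16777216)
    (μ : Microarch)
    (hμ : UserX.MicroOK μ)
    (u₀ : State)
    (hcode : HasCodeNat Lay u₀ L.decode_residue.entry Code.code_decode_residue.nat L.decode_residue.size)
    (h_load8 : SmallCheck Lay μ WayInv (CodeOK u₀) [Reg.rax, Reg.rcx, Reg.rdx] 8 L.__asan_load8_noabort.entry)
    (h_load1 : SmallCheck Lay μ WayInv (CodeOK u₀) [Reg.rax, Reg.rdx] 1 L.__asan_load1_noabort.entry)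
    (h_load4 : SmallCheck Lay μ WayInv (CodeOK u₀) [Reg.rax, Reg.rcx, Reg.rdx] 4 L.__asan_load4_noabort.entry)
    (h_load2 : SmallCheck Lay μ WayInv (CodeOK u₀) [Reg.rax, Reg.rcx, Reg.rdx] 2 L.__asan_load2_noabort.entry)
    (h_scalar :
      ∀ (others : List Obj) (frames : List (Nat × FrameLayout)) (Blk : Block → Prop) (len : Nat),
        Calls Lay μ WayInv (conv u₀) L.codebook_decode_scalar_raw.entry
          (codebook_decode_scalar_raw.spec others frames Blk len))
    (g : G)
    (hent : Entered u₀ g)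
    (cs pcount : Nat)
    (v s : State)
    (hm : At17Mid1 u₀ g v s)
    (he :
      AtEntry (conv u₀) L.decode_residue.entry (decode_residue.spec g.len g.A g.others g.frames g.stored g.room g.ysz).frame
        g.ret g.e)
    (he_rip : g.e.rip = L.decode_residue.entry)
    (he_retAddr : UInt64.ofNat (g.e.mem.readLE (g.e.reg Reg.rsp) 8) = g.ret)
    (he_ret_lt : g.ret < 1073741824)
    (he_align : UInt64.toNat (g.e.reg Reg.rsp) % 8 = 0)
    (he_code : (conv u₀).code.In g.e.mem)
    (he_inv : (conv u₀).inv g.e)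
    (he_room : 7340032 + 848 ≤ UInt64.toNat (g.e.reg Reg.rsp))
    (he_top : UInt64.toNat (g.e.reg Reg.rsp) + 8 ≤ 8388608)
    (he_stack : Lay.Has (g.e.reg Reg.rsp - 848) 856)
    (he_eq : Mem.EqOn L.textLo L.textHi u₀.mem g.e.mem)
    (he_df : g.e.flags.get Flag.df = false)
    (he_mx : g.e.mxcsr &&& 8064 = 8064)
    (he_sse : SseOK g.e)
    (hrip : v.rip = L.decode_residue.cut17)
    (hc : Common u₀ g v)
    (hch3 : 3 ≤ g.ch)
    (hr12 : v.reg Reg.r12 = UInt64.ofNat g.r)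
    (hloop : DecodeA g cs pcount v)
    (hpre : Pre g.len g.A g.others g.frames g.stored g.room g.ysz g.e)
    (hob : g.Blk (objBlock g.f))
    (hobin : 1048576 ≤ UInt64.toNat (g.e.reg Reg.rdi) ∧ UInt64.toNat (g.e.reg Reg.rdi) + 1808 ≤ 12582912)
    (hobst : UInt64.toNat (g.e.reg Reg.rdi) + 1808 ≤ 7340032 ∨ 8388608 ≤ UInt64.toNat (g.e.reg Reg.rdi))
    (ef : g.f = UInt64.toNat (g.e.reg Reg.rdi))
    (hr : g.e.reg Reg.rdi = addr g.f)
    (hs_rsp : s.reg Reg.rsp = g.e.reg Reg.rsp - 248)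
    (hs_rbp : s.reg Reg.rbp = g.e.reg Reg.rsp - 8)
    (hs_r12 : s.reg Reg.r12 = UInt64.ofNat g.r)
    (hs_r13 : s.reg Reg.r13 = g.e.reg Reg.rdi)
    (hs_rdi : s.reg Reg.rdi = g.e.reg Reg.rdi + 1764)
    (hdf : s.flags.get Flag.df = false)
    (hmx : s.mxcsr &&& 8064 = 8064)
    (hsse : SseOK s)
    (hscal :
      Calls Lay μ WayInv (conv u₀) L.codebook_decode_scalar_raw.entry
        (codebook_decode_scalar_raw.spec g.others' g.frames' g.Blk g.len))
    (hwf : 1154368 ≤ UInt64.toNat (g.e.reg Reg.rdi))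
    (hfr_f : UInt64.ofNat (s.mem.readLE (g.e.reg Reg.rsp - 184) 8) = g.e.reg Reg.rdi)
    (r1768 : s.mem.readLE (g.e.reg Reg.rdi + 1768) 4 = s.mem.u32 (g.f + 1768))
    (hm9 :
      Mem.SameExcept
        [{ lo := UInt64.toNat (g.e.reg Reg.rsp) - 848, hi := UInt64.toNat (g.e.reg Reg.rsp) - 248 },
          { lo := UInt64.toNat (g.e.reg Reg.rsp) - 192, hi := UInt64.toNat (g.e.reg Reg.rsp) - 176 },
          { lo := UInt64.toNat (g.e.reg Reg.rsp) - 160, hi := UInt64.toNat (g.e.reg Reg.rsp) - 156 },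
          { lo := UInt64.toNat (g.e.reg Reg.rdi) + 48, hi := UInt64.toNat (g.e.reg Reg.rdi) + 56 },
          { lo := UInt64.toNat (g.e.reg Reg.rdi) + 84, hi := UInt64.toNat (g.e.reg Reg.rdi) + 96 },
          { lo := UInt64.toNat (g.e.reg Reg.rdi) + 136, hi := UInt64.toNat (g.e.reg Reg.rdi) + 144 },
          { lo := UInt64.toNat (g.e.reg Reg.rdi) + 1484, hi := UInt64.toNat (g.e.reg Reg.rdi) + 1749 },
          { lo := UInt64.toNat (g.e.reg Reg.rdi) + 1752, hi := UInt64.toNat (g.e.reg Reg.rdi) + 1784 },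
          { lo := g.TB.base + 8 * g.C, hi := g.TB.base + g.TB.size }]
        v.mem s.mem)
    (hcs : Common u₀ g s)
    (hvs : Real.VorbisOK g.len g.Blk s.mem g.f)
    (hL : BlkLive g.Blk g.Live')
    (hbits : Bits g.Blk g.len s.mem g.f)
    (hras : ResidueAtOK g.Blk s.mem g.f g.r)
    (hi7 : ((Residue.classbook s.mem g.r : Nat) : Int) < stb_vorbis.codebook_count s.mem g.f)
    (c : Nat)
    (hs_r14 : s.reg Reg.r14 = UInt64.ofNat c)
    (hcdef : Residue.cbk s.mem g.f g.r = c)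
    (ecv : Residue.cbk v.mem g.f g.r = c)
    (hcbok : CodebookOK g.Blk s.mem c)
    (hcB :
      g.Blk
        { base := stb_vorbis.codebooks s.mem g.f,
          size := Off.sizeof.Codebook * (stb_vorbis.codebook_count s.mem g.f).toNat })
    (hcin : (codebooksBlock s.mem g.f).contains c Off.sizeof.Codebook)
    (hapart : BookApart s.mem g.f c)
    (hcloc :
      1048576 ≤ c ∧
        c + 2120 ≤ 12582912 ∧
          (c + 2120 ≤ 7340032 ∨ 8388608 ≤ c) ∧
            (c + 2120 ≤ UInt64.toNat (g.e.reg Reg.rdi) ∨ UInt64.toNat (g.e.reg Reg.rdi) + 1808 ≤ c))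
    (acc : Nat)
    (r1764 : s.mem.readLE (g.e.reg Reg.rdi + 1764) 4 = acc)
    (hacc : s.mem.u32 (g.f + 1764) = acc)
    (hacclt : acc < 2 ^ 32)
    (s_10f36f : State)
    (w_has_10f36f : Lay.Has (g.e.reg Reg.rsp - 256) 8)
    (s_10f36fr : State)
    (w_df_10f36f : s_10f36fr.flags.get Flag.df = false)
    (w_acc_10f36f : Lay.Has (g.e.reg Reg.rdi + 1764) 4)
    (w_has_10f374 : Lay.Has (g.e.reg Reg.rsp - 184) 8)
    (s_10f38f : State)
    (k : Nat)
    (hklt : k < 1024)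
    (hk : acc &&& 1023 = k)
    (hdf1 : s_10f38f.flags.get Flag.df = false)
    (x : Nat)
    (hx : s.mem.u16 (c + 48 + 2 * k) = x)
    (hxlt : x < 65536)
    (hfh : Codebook.fast_huffman s.mem c k = sint16 x)
    (rfh : s.mem.readLE (UInt64.ofNat c + UInt64.ofNat (k + 24) * 2) 2 = x)
    (rcl : s.mem.readLE (UInt64.ofNat c + 8) 8 = Codebook.codeword_lengths s.mem c)
    (s_10f393r : State)
    (w_df_10f393 : s_10f393r.flags.get Flag.df = false)
    (w_acc_10f393 : Lay.Has (UInt64.ofNat (c + 48 + 2 * k)) 2)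
    (w_has_10f3a0 : Lay.Has (g.e.reg Reg.rsp - 192) 4)
    (hbr_10f3a8 : (BitVec.signExtend 32 (BitVec.setWidth 16 (BitVec.zeroExtend 32 (BitVec.ofNat 16 x)))).msb = false)
    (s_10f3b2r : State)
    (w_df_10f3b2 : s_10f3b2r.flags.get Flag.df = false)
    (w_acc_10f3b2 : Lay.Has (UInt64.ofNat c + 8) 8)
    (s_10f3bf : State)
    (hxpos : x < 32768)
    (hfh0 : Codebook.fast_huffman s.mem c k = ↑x)
    (cl : Nat)
    (hcl : Codebook.codeword_lengths s.mem c = cl)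
    (hdf2 : s_10f3bf.flags.get Flag.df = false)
    (hsl : Site g.Live' (cl + x) 1)
    (hclB : g.Blk { base := Codebook.codeword_lengths s.mem c, size := (Codebook.N s.mem c).toNat })
    (hxN : x < (Codebook.N s.mem c).toNat)
    (ln : Nat)
    (hln : s.mem.u8 (cl + x) = ln)
    (hlnlt : ln < 256)
    (rln : s.mem.readLE (UInt64.ofNat x + UInt64.ofNat cl) 1 = ln)
    (s_10f3c2r : State)
    (w_df_10f3c2 : s_10f3c2r.flags.get Flag.df = false)
    (w_acc_10f3c2 : Lay.Has (UInt64.ofNat x + UInt64.ofNat cl) 1)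
    (fl_10f3cd : Flag → Bool)
    (s_10f3e1 : State)
    (w_rip : s_10f3e1.rip = 1111016)
    (w_rdi : s_10f3e1.reg Reg.rdi = g.e.reg Reg.rdi + 1768)
    (w_rbx :
      s_10f3e1.reg Reg.rbx = Word.ofBV (BitVec.zeroExtend 32 (BitVec.setWidth 8 (BitVec.zeroExtend 32 (BitVec.ofNat 8 ln)))))
    (w_r13 : s_10f3e1.reg Reg.r13 = g.e.reg Reg.rdi)
    (w_rsp : s_10f3e1.reg Reg.rsp = g.e.reg Reg.rsp - 248)
    (w_rcx : s_10f3e1.reg Reg.rcx = Word.ofBV (BitVec.zeroExtend 32 (BitVec.ofNat 8 ln)))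
    (w_rdx : s_10f3e1.reg Reg.rdx = g.e.reg Reg.rdi)
    (w_kept : RegsKept [Reg.rdi, Reg.rbx, Reg.r13, Reg.rsp, Reg.rax, Reg.rcx, Reg.rdx] s s_10f3e1)
    (w_mem :
      s_10f3e1.mem =
        ((((((s.mem.writeLE (g.e.reg Reg.rsp - 256) 8 1110900).writeLE (g.e.reg Reg.rsp - 184) 8
                              (UInt64.toNat (g.e.reg Reg.rdi))).writeLE
                          (g.e.reg Reg.rsp - 256) 8 1110936).writeLE
                      (g.e.reg Reg.rsp - 192) 4 x).writeLE
                  (g.e.reg Reg.rsp - 256) 8 1110967).writeLE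
              (g.e.reg Reg.rsp - 256) 8 1110983).writeLE
          (g.e.reg Reg.rdi + 1764) 4
          (Word.part Width.w32 (UInt64.ofNat acc) >>>
              ((BitVec.setWidth 8 (BitVec.zeroExtend 32 (BitVec.ofNat 8 ln))).toNat % 32)).toNat)
    (w_eq : Mem.EqOn 1048576 1154368 u₀.mem s_10f3e1.mem)
    (w_flags :
      s_10f3e1.flags =
        s_10f3c2r.flags.setStatus
          ((Alu.shift ShiftOp.shr (Word.part Width.w32 (UInt64.ofNat acc))
                  (BitVec.setWidth 8 (BitVec.zeroExtend 32 (BitVec.ofNat 8 ln)))).flags.fill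
            fl_10f3cd))
    (w_mxcsr : s_10f3e1.mxcsr = s.mxcsr)
    (w_zmm : s_10f3e1.zmm = s_10f36f.zmm) :
    ReachVia Lay μ WayInv s_10f3e1 fun s' => At17Mid2 u₀ g v s' := by
  obtain ⟨accn, haccn⟩ : ∃ a, (Word.part Width.w32 (UInt64.ofNat acc) >>>
      ((BitVec.setWidth 8 (BitVec.zeroExtend 32 (BitVec.ofNat 8 ln))).toNat % 32)).toNat = a := ⟨_, rfl⟩
  rw [haccn] at w_mem
  rw [len_word ln hlnlt] at w_rbx
  have hdf3 : s_10f3e1.flags .df = false := by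
    rw [w_flags]
    simp only [X86.User.df_setStatus]
    exact w_df_10f3c2
  clear w_flags w_rcx
  obtain ⟨vb, hvb⟩ : ∃ vb, s.mem.u32 (g.f + 1768) = vb := ⟨_, rfl⟩
  have hvblt : vb < 2 ^ 32 := by
    rw [← hvb]
    exact Mem.u32_lt _ _
  rw [hvb] at r1768
  u_walk hcode [hμ.vendor] until [Vorbis.L.decode_residue.chk48] span [Vorbis.L.textLo, Vorbis.L.textHi] side (v_side)
  case check_10f3e8 =>
    -- 0x10f3e8, load4 [f + 1768] (`f->valid_bits`)
    have hun : ShadowUntouched s.mem s_10f3e8.mem := by v_untouched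
    have hs := hbits.site_field hL 1768 4 (by omega) (by omega) rfl
    exact Vorbis.Spec.check_site hcs.shadow hun hs (by u_omega)
  · -- `valid_bits − len < 0`
    exact end_negative Lay μ u₀ g v s hm he_align he_room he_top hobin hobst ef hs_rsp hs_rbp hs_r12 hdf hmx hwf hbits c hs_r14
      ecv hcloc s_10f36f x ln hlnlt s_10f3e1 accn hdf3 vb hvblt s_10f3e8r w_df_10f3e8 hbr_10f403 s_10f409 w_rip w_rdi w_rbx
      w_r13 w_rsp w_rax w_kept w_mem w_eq w_flags w_mxcsr w_zmm
  · -- `valid_bits − len ≥ 0`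
    exact end_fast Lay μ u₀ g v s hm he_align he_room he_top hobin hobst ef hs_rsp hs_rbp hs_r12 hdf hmx hwf hbits c hs_r14 ecv
      hcbok hcloc s_10f36f k hklt x hxlt hxpos hfh0 ln hlnlt s_10f3e1 accn hdf3 vb hvb hvblt s_10f3e8r w_df_10f3e8 hbr_10f403
      s_10f409 w_rip w_rdi w_rbx w_r13 w_rsp w_rax w_kept w_mem w_eq w_flags w_mxcsr w_zmm

/-- **The fast path from the stop at `chk46`** (0x10f3c2, the check of `c->codeword_lengths[x]`; `x = fast_huffman[k] ≥ 0`):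
the length byte, `acc >>= len`, the store of `acc`, to the stop at `chk47`. -/
theorem stop_chk46
    (Lay : Layout)
    (hLay : Lay.hi = 16777216)
    (μ : Microarch)
    (hμ : UserX.MicroOK μ)
    (u₀ : State)
    (hcode : HasCodeNat Lay u₀ L.decode_residue.entry Code.code_decode_residue.nat L.decode_residue.size)
    (h_load8 : SmallCheck Lay μ WayInv (CodeOK u₀) [Reg.rax, Reg.rcx, Reg.rdx] 8 L.__asan_load8_noabort.entry)
    (h_load1 : SmallCheck Lay μ WayInv (CodeOK u₀) [Reg.rax, Reg.rdx] 1 L.__asan_load1_noabort.entry)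
    (h_load4 : SmallCheck Lay μ WayInv (CodeOK u₀) [Reg.rax, Reg.rcx, Reg.rdx] 4 L.__asan_load4_noabort.entry)
    (h_load2 : SmallCheck Lay μ WayInv (CodeOK u₀) [Reg.rax, Reg.rcx, Reg.rdx] 2 L.__asan_load2_noabort.entry)
    (h_scalar :
      ∀ (others : List Obj) (frames : List (Nat × FrameLayout)) (Blk : Block → Prop) (len : Nat),
        Calls Lay μ WayInv (conv u₀) L.codebook_decode_scalar_raw.entry
          (codebook_decode_scalar_raw.spec others frames Blk len))
    (g : G)
    (hent : Entered u₀ g)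
    (cs pcount : Nat)
    (v s : State)
    (hm : At17Mid1 u₀ g v s)
    (he :
      AtEntry (conv u₀) L.decode_residue.entry (decode_residue.spec g.len g.A g.others g.frames g.stored g.room g.ysz).frame
        g.ret g.e)
    (he_rip : g.e.rip = L.decode_residue.entry)
    (he_retAddr : UInt64.ofNat (g.e.mem.readLE (g.e.reg Reg.rsp) 8) = g.ret)
    (he_ret_lt : g.ret < 1073741824)
    (he_align : UInt64.toNat (g.e.reg Reg.rsp) % 8 = 0)
    (he_code : (conv u₀).code.In g.e.mem)
    (he_inv : (conv u₀).inv g.e)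
    (he_room : 7340032 + 848 ≤ UInt64.toNat (g.e.reg Reg.rsp))
    (he_top : UInt64.toNat (g.e.reg Reg.rsp) + 8 ≤ 8388608)
    (he_stack : Lay.Has (g.e.reg Reg.rsp - 848) 856)
    (he_eq : Mem.EqOn L.textLo L.textHi u₀.mem g.e.mem)
    (he_df : g.e.flags.get Flag.df = false)
    (he_mx : g.e.mxcsr &&& 8064 = 8064)
    (he_sse : SseOK g.e)
    (hrip : v.rip = L.decode_residue.cut17)
    (hc : Common u₀ g v)
    (hch3 : 3 ≤ g.ch)
    (hr12 : v.reg Reg.r12 = UInt64.ofNat g.r)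
    (hloop : DecodeA g cs pcount v)
    (hpre : Pre g.len g.A g.others g.frames g.stored g.room g.ysz g.e)
    (hob : g.Blk (objBlock g.f))
    (hobin : 1048576 ≤ UInt64.toNat (g.e.reg Reg.rdi) ∧ UInt64.toNat (g.e.reg Reg.rdi) + 1808 ≤ 12582912)
    (hobst : UInt64.toNat (g.e.reg Reg.rdi) + 1808 ≤ 7340032 ∨ 8388608 ≤ UInt64.toNat (g.e.reg Reg.rdi))
    (ef : g.f = UInt64.toNat (g.e.reg Reg.rdi))
    (hr : g.e.reg Reg.rdi = addr g.f)
    (hs_rsp : s.reg Reg.rsp = g.e.reg Reg.rsp - 248)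
    (hs_rbp : s.reg Reg.rbp = g.e.reg Reg.rsp - 8)
    (hs_r12 : s.reg Reg.r12 = UInt64.ofNat g.r)
    (hs_r13 : s.reg Reg.r13 = g.e.reg Reg.rdi)
    (hs_rdi : s.reg Reg.rdi = g.e.reg Reg.rdi + 1764)
    (hdf : s.flags.get Flag.df = false)
    (hmx : s.mxcsr &&& 8064 = 8064)
    (hsse : SseOK s)
    (hscal :
      Calls Lay μ WayInv (conv u₀) L.codebook_decode_scalar_raw.entry
        (codebook_decode_scalar_raw.spec g.others' g.frames' g.Blk g.len))
    (hwf : 1154368 ≤ UInt64.toNat (g.e.reg Reg.rdi))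
    (hfr_f : UInt64.ofNat (s.mem.readLE (g.e.reg Reg.rsp - 184) 8) = g.e.reg Reg.rdi)
    (r1768 : s.mem.readLE (g.e.reg Reg.rdi + 1768) 4 = s.mem.u32 (g.f + 1768))
    (hm9 :
      Mem.SameExcept
        [{ lo := UInt64.toNat (g.e.reg Reg.rsp) - 848, hi := UInt64.toNat (g.e.reg Reg.rsp) - 248 },
          { lo := UInt64.toNat (g.e.reg Reg.rsp) - 192, hi := UInt64.toNat (g.e.reg Reg.rsp) - 176 },
          { lo := UInt64.toNat (g.e.reg Reg.rsp) - 160, hi := UInt64.toNat (g.e.reg Reg.rsp) - 156 },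
          { lo := UInt64.toNat (g.e.reg Reg.rdi) + 48, hi := UInt64.toNat (g.e.reg Reg.rdi) + 56 },
          { lo := UInt64.toNat (g.e.reg Reg.rdi) + 84, hi := UInt64.toNat (g.e.reg Reg.rdi) + 96 },
          { lo := UInt64.toNat (g.e.reg Reg.rdi) + 136, hi := UInt64.toNat (g.e.reg Reg.rdi) + 144 },
          { lo := UInt64.toNat (g.e.reg Reg.rdi) + 1484, hi := UInt64.toNat (g.e.reg Reg.rdi) + 1749 },
          { lo := UInt64.toNat (g.e.reg Reg.rdi) + 1752, hi := UInt64.toNat (g.e.reg Reg.rdi) + 1784 },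
          { lo := g.TB.base + 8 * g.C, hi := g.TB.base + g.TB.size }]
        v.mem s.mem)
    (hcs : Common u₀ g s)
    (hvs : Real.VorbisOK g.len g.Blk s.mem g.f)
    (hL : BlkLive g.Blk g.Live')
    (hbits : Bits g.Blk g.len s.mem g.f)
    (hras : ResidueAtOK g.Blk s.mem g.f g.r)
    (hi7 : ((Residue.classbook s.mem g.r : Nat) : Int) < stb_vorbis.codebook_count s.mem g.f)
    (c : Nat)
    (hs_r14 : s.reg Reg.r14 = UInt64.ofNat c)
    (hcdef : Residue.cbk s.mem g.f g.r = c)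
    (ecv : Residue.cbk v.mem g.f g.r = c)
    (hcbok : CodebookOK g.Blk s.mem c)
    (hcB :
      g.Blk
        { base := stb_vorbis.codebooks s.mem g.f,
          size := Off.sizeof.Codebook * (stb_vorbis.codebook_count s.mem g.f).toNat })
    (hcin : (codebooksBlock s.mem g.f).contains c Off.sizeof.Codebook)
    (hapart : BookApart s.mem g.f c)
    (hcloc :
      1048576 ≤ c ∧
        c + 2120 ≤ 12582912 ∧
          (c + 2120 ≤ 7340032 ∨ 8388608 ≤ c) ∧
            (c + 2120 ≤ UInt64.toNat (g.e.reg Reg.rdi) ∨ UInt64.toNat (g.e.reg Reg.rdi) + 1808 ≤ c))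
    (acc : Nat)
    (r1764 : s.mem.readLE (g.e.reg Reg.rdi + 1764) 4 = acc)
    (hacc : s.mem.u32 (g.f + 1764) = acc)
    (hacclt : acc < 2 ^ 32)
    (s_10f36f : State)
    (w_has_10f36f : Lay.Has (g.e.reg Reg.rsp - 256) 8)
    (s_10f36fr : State)
    (w_df_10f36f : s_10f36fr.flags.get Flag.df = false)
    (w_acc_10f36f : Lay.Has (g.e.reg Reg.rdi + 1764) 4)
    (w_has_10f374 : Lay.Has (g.e.reg Reg.rsp - 184) 8)
    (s_10f38f : State)
    (k : Nat)
    (hklt : k < 1024)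
    (hk : acc &&& 1023 = k)
    (hdf1 : s_10f38f.flags.get Flag.df = false)
    (x : Nat)
    (hx : s.mem.u16 (c + 48 + 2 * k) = x)
    (hxlt : x < 65536)
    (hfh : Codebook.fast_huffman s.mem c k = sint16 x)
    (rfh : s.mem.readLE (UInt64.ofNat c + UInt64.ofNat (k + 24) * 2) 2 = x)
    (rcl : s.mem.readLE (UInt64.ofNat c + 8) 8 = Codebook.codeword_lengths s.mem c)
    (s_10f393r : State)
    (w_df_10f393 : s_10f393r.flags.get Flag.df = false)
    (w_acc_10f393 : Lay.Has (UInt64.ofNat (c + 48 + 2 * k)) 2)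
    (w_has_10f3a0 : Lay.Has (g.e.reg Reg.rsp - 192) 4)
    (hbr_10f3a8 : (BitVec.signExtend 32 (BitVec.setWidth 16 (BitVec.zeroExtend 32 (BitVec.ofNat 16 x)))).msb = false)
    (s_10f3b2r : State)
    (w_df_10f3b2 : s_10f3b2r.flags.get Flag.df = false)
    (w_acc_10f3b2 : Lay.Has (UInt64.ofNat c + 8) 8)
    (s_10f3bf : State)
    (w_rip : s_10f3bf.rip = 1110978)
    (w_rdi :
      s_10f3bf.reg Reg.rdi =
        Word.ofBV (BitVec.signExtend 64 (BitVec.setWidth 16 (BitVec.zeroExtend 32 (BitVec.ofNat 16 x)))) +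
          UInt64.ofNat (Codebook.codeword_lengths s.mem c))
    (w_rbx :
      s_10f3bf.reg Reg.rbx =
        Word.ofBV (BitVec.signExtend 64 (BitVec.setWidth 16 (BitVec.zeroExtend 32 (BitVec.ofNat 16 x)))) +
          UInt64.ofNat (Codebook.codeword_lengths s.mem c))
    (w_r13 : s_10f3bf.reg Reg.r13 = UInt64.ofNat acc)
    (w_rsp : s_10f3bf.reg Reg.rsp = g.e.reg Reg.rsp - 248)
    (w_kept : RegsKept [Reg.rdi, Reg.rbx, Reg.r13, Reg.rsp, Reg.rax, Reg.rcx, Reg.rdx] s s_10f3bf)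
    (w_mem :
      s_10f3bf.mem =
        ((((s.mem.writeLE (g.e.reg Reg.rsp - 256) 8 1110900).writeLE (g.e.reg Reg.rsp - 184) 8
                      (UInt64.toNat (g.e.reg Reg.rdi))).writeLE
                  (g.e.reg Reg.rsp - 256) 8 1110936).writeLE
              (g.e.reg Reg.rsp - 192) 4
              (BitVec.signExtend 32 (BitVec.setWidth 16 (BitVec.zeroExtend 32 (BitVec.ofNat 16 x)))).toNat).writeLE
          (g.e.reg Reg.rsp - 256) 8 1110967)
    (w_eq : Mem.EqOn 1048576 1154368 u₀.mem s_10f3bf.mem)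
    (w_flags :
      s_10f3bf.flags =
        s_10f3b2r.flags.setStatus
          (Alu.add (BitVec.signExtend 64 (BitVec.setWidth 16 (BitVec.zeroExtend 32 (BitVec.ofNat 16 x))))
              (BitVec.ofNat 64 (Codebook.codeword_lengths s.mem c))).flags)
    (w_mxcsr : s_10f3bf.mxcsr = s.mxcsr)
    (w_zmm : s_10f3bf.zmm = s_10f36f.zmm) :
    ReachVia Lay μ WayInv s_10f3bf fun s' => At17Mid2 u₀ g v s' := by
  have hxpos : x < 32768 := fh_pos x hxlt hbr_10f3a8
  have hfh0 : Codebook.fast_huffman s.mem c k = (x : Int) := by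
    rw [hfh]
    unfold sint16
    rw [if_pos hxpos]
  obtain ⟨cl, hcl⟩ : ∃ cl, Codebook.codeword_lengths s.mem c = cl := ⟨_, rfl⟩
  rw [hcl] at w_rbx w_rdi
  rw [fh_word64 x hxpos] at w_rbx w_rdi
  rw [fh_nat32 x hxpos] at w_mem
  have hdf2 : s_10f3bf.flags .df = false := by
    rw [w_flags]
    simp only [X86.User.df_setStatus]
    exact w_df_10f3b2
  clear w_flags
  -- where `codeword_lengths[x]` is
  have hsl : Site g.Live' (cl + x) 1 := by
    apply hcbok.site_lengths_of_fast hL k hklt (by rw [hfh0]; omega)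
    rw [hfh0, ← hcl]
    simp only [vacc, Int.toNat_natCast]
  have hclB := hcbok.lengths_block
  have hclst := hpre.free.offStack _ hclB
  have hclin := hsl.inside hcs.point.env.covers
  have hclf := hapart.lengths
  have hK5 := hcbok.K5 k hklt
  rw [hfh0] at hK5
  unfold Codebook.clBlock at hclf
  simp only [vblock, voff] at hclst hclf
  rw [hcl] at hclst hclf
  rw [ef] at hclf
  have hxN : x < (Codebook.N s.mem c).toNat := by omega
  have hclloc : (cl + x + 1 ≤ 0x700000 ∨ 0x800000 ≤ cl + x) ∧
      (cl + x + 1 ≤ (g.e.reg .rdi).toNat ∨ (g.e.reg .rdi).toNat + 1808 ≤ cl + x) := by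
    omega
  clear hclst hclf hK5
  obtain ⟨ln, hln⟩ : ∃ ln, s.mem.u8 (cl + x) = ln := ⟨_, rfl⟩
  have hlnlt : ln < 256 := by
    rw [← hln]
    exact Mem.u8_lt _ _
  have rln : s.mem.readLE (UInt64.ofNat x + UInt64.ofNat cl) 1 = ln := by
    rw [← hln]
    have e : UInt64.ofNat x + UInt64.ofNat cl = addr (cl + x) := by
      apply UInt64.toNat_inj.mp
      unfold addr
      u_omega
    rw [e]
    rfl
  u_walk hcode [hμ.vendor] until [Vorbis.L.decode_residue.chk47] span [Vorbis.L.textLo, Vorbis.L.textHi] side (v_side)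
  case check_10f3c2 =>
    have hun : ShadowUntouched s.mem s_10f3c2.mem := by v_untouched
    exact Vorbis.Spec.check_site hcs.shadow hun hsl (by u_omega)
  -- 0x10f3e8: the registers as numbers; `accn = acc >> len`
  exact stop_chk47 Lay hLay μ hμ u₀ hcode h_load8 h_load1 h_load4 h_load2 h_scalar g hent cs pcount v s hm he he_rip he_retAddr
    he_ret_lt he_align he_code he_inv he_room he_top he_stack he_eq he_df he_mx he_sse hrip hc hch3 hr12 hloop hpre hob hobin
    hobst ef hr hs_rsp hs_rbp hs_r12 hs_r13 hs_rdi hdf hmx hsse hscal hwf hfr_f r1768 hm9 hcs hvs hL hbits hras hi7 c hs_r14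
    hcdef ecv hcbok hcB hcin hapart hcloc acc r1764 hacc hacclt s_10f36f w_has_10f36f s_10f36fr w_df_10f36f w_acc_10f36f
    w_has_10f374 s_10f38f k hklt hk hdf1 x hx hxlt hfh rfh rcl s_10f393r w_df_10f393 w_acc_10f393 w_has_10f3a0 hbr_10f3a8
    s_10f3b2r w_df_10f3b2 w_acc_10f3b2 s_10f3bf hxpos hfh0 cl hcl hdf2 hsl hclB hxN ln hln hlnlt rln s_10f3c2r w_df_10f3c2
    w_acc_10f3c2 fl_10f3cd s_10f3e1 w_rip w_rdi w_rbx w_r13 w_rsp w_rcx w_rdx w_kept w_mem w_eq w_flags w_mxcsr w_zmm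

/-- **From the stop at `chk44`** (0x10f393, the check of `c->fast_huffman[acc & 1023]`): the registers as numbers, the table's
entry `x`; a negative entry: the precondition of `codebook_decode_scalar_raw` (`pre_10f4dd`) and its return; else the check of
`c->codeword_lengths` and the stop at `chk46`. -/
theorem stop_chk44
    (Lay : Layout)
    (hLay : Lay.hi = 16777216)
    (μ : Microarch)
    (hμ : UserX.MicroOK μ)
    (u₀ : State)
    (hcode : HasCodeNat Lay u₀ L.decode_residue.entry Code.code_decode_residue.nat L.decode_residue.size)
    (h_load8 : SmallCheck Lay μ WayInv (CodeOK u₀) [Reg.rax, Reg.rcx, Reg.rdx] 8 L.__asan_load8_noabort.entry)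
    (h_load1 : SmallCheck Lay μ WayInv (CodeOK u₀) [Reg.rax, Reg.rdx] 1 L.__asan_load1_noabort.entry)
    (h_load4 : SmallCheck Lay μ WayInv (CodeOK u₀) [Reg.rax, Reg.rcx, Reg.rdx] 4 L.__asan_load4_noabort.entry)
    (h_load2 : SmallCheck Lay μ WayInv (CodeOK u₀) [Reg.rax, Reg.rcx, Reg.rdx] 2 L.__asan_load2_noabort.entry)
    (h_scalar :
      ∀ (others : List Obj) (frames : List (Nat × FrameLayout)) (Blk : Block → Prop) (len : Nat),
        Calls Lay μ WayInv (conv u₀) L.codebook_decode_scalar_raw.entry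
          (codebook_decode_scalar_raw.spec others frames Blk len))
    (g : G)
    (hent : Entered u₀ g)
    (cs pcount : Nat)
    (v s : State)
    (hm : At17Mid1 u₀ g v s)
    (he :
      AtEntry (conv u₀) L.decode_residue.entry (decode_residue.spec g.len g.A g.others g.frames g.stored g.room g.ysz).frame
        g.ret g.e)
    (he_rip : g.e.rip = L.decode_residue.entry)
    (he_retAddr : UInt64.ofNat (g.e.mem.readLE (g.e.reg Reg.rsp) 8) = g.ret)
    (he_ret_lt : g.ret < 1073741824)
    (he_align : UInt64.toNat (g.e.reg Reg.rsp) % 8 = 0)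
    (he_code : (conv u₀).code.In g.e.mem)
    (he_inv : (conv u₀).inv g.e)
    (he_room : 7340032 + 848 ≤ UInt64.toNat (g.e.reg Reg.rsp))
    (he_top : UInt64.toNat (g.e.reg Reg.rsp) + 8 ≤ 8388608)
    (he_stack : Lay.Has (g.e.reg Reg.rsp - 848) 856)
    (he_eq : Mem.EqOn L.textLo L.textHi u₀.mem g.e.mem)
    (he_df : g.e.flags.get Flag.df = false)
    (he_mx : g.e.mxcsr &&& 8064 = 8064)
    (he_sse : SseOK g.e)
    (hrip : v.rip = L.decode_residue.cut17)
    (hc : Common u₀ g v)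
    (hch3 : 3 ≤ g.ch)
    (hr12 : v.reg Reg.r12 = UInt64.ofNat g.r)
    (hloop : DecodeA g cs pcount v)
    (hpre : Pre g.len g.A g.others g.frames g.stored g.room g.ysz g.e)
    (hob : g.Blk (objBlock g.f))
    (hobin : 1048576 ≤ UInt64.toNat (g.e.reg Reg.rdi) ∧ UInt64.toNat (g.e.reg Reg.rdi) + 1808 ≤ 12582912)
    (hobst : UInt64.toNat (g.e.reg Reg.rdi) + 1808 ≤ 7340032 ∨ 8388608 ≤ UInt64.toNat (g.e.reg Reg.rdi))
    (ef : g.f = UInt64.toNat (g.e.reg Reg.rdi))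
    (hr : g.e.reg Reg.rdi = addr g.f)
    (hs_rsp : s.reg Reg.rsp = g.e.reg Reg.rsp - 248)
    (hs_rbp : s.reg Reg.rbp = g.e.reg Reg.rsp - 8)
    (hs_r12 : s.reg Reg.r12 = UInt64.ofNat g.r)
    (hs_r13 : s.reg Reg.r13 = g.e.reg Reg.rdi)
    (hs_rdi : s.reg Reg.rdi = g.e.reg Reg.rdi + 1764)
    (hdf : s.flags.get Flag.df = false)
    (hmx : s.mxcsr &&& 8064 = 8064)
    (hsse : SseOK s)
    (hscal :
      Calls Lay μ WayInv (conv u₀) L.codebook_decode_scalar_raw.entry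
        (codebook_decode_scalar_raw.spec g.others' g.frames' g.Blk g.len))
    (hwf : 1154368 ≤ UInt64.toNat (g.e.reg Reg.rdi))
    (hfr_f : UInt64.ofNat (s.mem.readLE (g.e.reg Reg.rsp - 184) 8) = g.e.reg Reg.rdi)
    (r1768 : s.mem.readLE (g.e.reg Reg.rdi + 1768) 4 = s.mem.u32 (g.f + 1768))
    (hm9 :
      Mem.SameExcept
        [{ lo := UInt64.toNat (g.e.reg Reg.rsp) - 848, hi := UInt64.toNat (g.e.reg Reg.rsp) - 248 },
          { lo := UInt64.toNat (g.e.reg Reg.rsp) - 192, hi := UInt64.toNat (g.e.reg Reg.rsp) - 176 },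
          { lo := UInt64.toNat (g.e.reg Reg.rsp) - 160, hi := UInt64.toNat (g.e.reg Reg.rsp) - 156 },
          { lo := UInt64.toNat (g.e.reg Reg.rdi) + 48, hi := UInt64.toNat (g.e.reg Reg.rdi) + 56 },
          { lo := UInt64.toNat (g.e.reg Reg.rdi) + 84, hi := UInt64.toNat (g.e.reg Reg.rdi) + 96 },
          { lo := UInt64.toNat (g.e.reg Reg.rdi) + 136, hi := UInt64.toNat (g.e.reg Reg.rdi) + 144 },
          { lo := UInt64.toNat (g.e.reg Reg.rdi) + 1484, hi := UInt64.toNat (g.e.reg Reg.rdi) + 1749 },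
          { lo := UInt64.toNat (g.e.reg Reg.rdi) + 1752, hi := UInt64.toNat (g.e.reg Reg.rdi) + 1784 },
          { lo := g.TB.base + 8 * g.C, hi := g.TB.base + g.TB.size }]
        v.mem s.mem)
    (hcs : Common u₀ g s)
    (hvs : Real.VorbisOK g.len g.Blk s.mem g.f)
    (hL : BlkLive g.Blk g.Live')
    (hbits : Bits g.Blk g.len s.mem g.f)
    (hras : ResidueAtOK g.Blk s.mem g.f g.r)
    (hi7 : ((Residue.classbook s.mem g.r : Nat) : Int) < stb_vorbis.codebook_count s.mem g.f)
    (c : Nat)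
    (hs_r14 : s.reg Reg.r14 = UInt64.ofNat c)
    (hcdef : Residue.cbk s.mem g.f g.r = c)
    (ecv : Residue.cbk v.mem g.f g.r = c)
    (hcbok : CodebookOK g.Blk s.mem c)
    (hcB :
      g.Blk
        { base := stb_vorbis.codebooks s.mem g.f,
          size := Off.sizeof.Codebook * (stb_vorbis.codebook_count s.mem g.f).toNat })
    (hcin : (codebooksBlock s.mem g.f).contains c Off.sizeof.Codebook)
    (hapart : BookApart s.mem g.f c)
    (hcloc :
      1048576 ≤ c ∧
        c + 2120 ≤ 12582912 ∧
          (c + 2120 ≤ 7340032 ∨ 8388608 ≤ c) ∧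
            (c + 2120 ≤ UInt64.toNat (g.e.reg Reg.rdi) ∨ UInt64.toNat (g.e.reg Reg.rdi) + 1808 ≤ c))
    (acc : Nat)
    (r1764 : s.mem.readLE (g.e.reg Reg.rdi + 1764) 4 = acc)
    (hacc : s.mem.u32 (g.f + 1764) = acc)
    (hacclt : acc < 2 ^ 32)
    (hklt : acc &&& 1023 < 1024)
    (s_10f36f : State)
    (w_has_10f36f : Lay.Has (g.e.reg Reg.rsp - 256) 8)
    (s_10f36fr : State)
    (w_df_10f36f : s_10f36fr.flags.get Flag.df = false)
    (w_acc_10f36f : Lay.Has (g.e.reg Reg.rdi + 1764) 4)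
    (w_has_10f374 : Lay.Has (g.e.reg Reg.rsp - 184) 8)
    (s_10f38f : State)
    (w_rip : s_10f38f.rip = 1110931)
    (w_rdi :
      s_10f38f.reg Reg.rdi = UInt64.ofNat c + (Word.ofBV (BitVec.setWidth 64 (BitVec.ofNat 32 acc &&& 1023#32)) + 24) * 2)
    (w_rbx : s_10f38f.reg Reg.rbx = Word.ofBV (BitVec.setWidth 64 (BitVec.ofNat 32 acc &&& 1023#32)) + 24)
    (w_r13 : s_10f38f.reg Reg.r13 = Word.ofBV (BitVec.ofNat 32 acc))
    (w_rsp : s_10f38f.reg Reg.rsp = g.e.reg Reg.rsp - 248)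
    (w_kept : RegsKept [Reg.rdi, Reg.rbx, Reg.r13, Reg.rsp, Reg.rax, Reg.rcx, Reg.rdx] s s_10f38f)
    (w_mem :
      s_10f38f.mem =
        (s.mem.writeLE (g.e.reg Reg.rsp - 256) 8 1110900).writeLE (g.e.reg Reg.rsp - 184) 8 (UInt64.toNat (g.e.reg Reg.rdi)))
    (w_eq : Mem.EqOn 1048576 1154368 u₀.mem s_10f38f.mem)
    (w_flags :
      s_10f38f.flags =
        s_10f36fr.flags.setStatus (Alu.add (BitVec.setWidth 64 (BitVec.ofNat 32 acc &&& 1023#32)) 24#64).flags)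
    (w_mxcsr : s_10f38f.mxcsr = s.mxcsr)
    (w_zmm : s_10f38f.zmm = s_10f36f.zmm) :
    ReachVia Lay μ WayInv s_10f38f fun s' => At17Mid2 u₀ g v s' := by
  -- 0x10f393: the registers as numbers; `k = acc & 1023`
  obtain ⟨k, hk⟩ : ∃ k, acc &&& 1023 = k := ⟨_, rfl⟩
  rw [hk] at hklt
  replace w_rbx : s_10f38f.reg .rbx = UInt64.ofNat (k + 24) := by
    rw [w_rbx, fast_index acc hacclt, hk]
  replace w_rdi : s_10f38f.reg .rdi = UInt64.ofNat (c + 48 + 2 * k) := by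
    rw [w_rdi, fast_index acc hacclt, hk]
    exact fast_addr c k (by omega) hklt
  replace w_r13 : s_10f38f.reg .r13 = UInt64.ofNat acc := by
    rw [w_r13]
    exact ofBV32_nat acc hacclt
  have hdf1 : s_10f38f.flags .df = false := by
    rw [w_flags]
    simp only [X86.User.df_setStatus]
    exact w_df_10f36f
  clear w_flags
  -- the table entry `x = c->fast_huffman[k]` as an unsigned 16-bit number
  obtain ⟨x, hx⟩ : ∃ x, s.mem.u16 (c + 48 + 2 * k) = x := ⟨_, rfl⟩
  have hxlt : x < 65536 := by
    rw [← hx]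
    exact Mem.u16_lt _ _
  have hfh : Codebook.fast_huffman s.mem c k = sint16 x := by
    simp only [vacc, voff]
    unfold Mem.i16
    rw [hx]
  have rfh : s.mem.readLE (UInt64.ofNat c + UInt64.ofNat (k + 24) * 2) 2 = x := by
    rw [fast_addr c k (by omega) hklt, ← hx]
    rfl
  have rcl : s.mem.readLE (UInt64.ofNat c + 8) 8 = Codebook.codeword_lengths s.mem c := by
    show s.mem.readLE (addr c + 8) 8 = _
    simp only [vfield, vacc, voff]
  u_walk hcode [hμ.vendor] until [Vorbis.L.decode_residue.chk46] span [Vorbis.L.textLo, Vorbis.L.textHi] side (v_side)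
  case check_10f393 =>
    -- 0x10f393, load2 `c->fast_huffman[acc & 1023]`
    have hun : ShadowUntouched s.mem s_10f393.mem := by v_untouched
    have hs := Codebook.site_fast_huffman hL hcB hcin k hklt (a := c + 48 + 2 * k) (by simp only [voff])
    exact Vorbis.Spec.check_site hcs.shadow hun hs (by u_omega)
  case check_10f3b2 =>
    -- 0x10f3b2, load8 [c + 8] (`c->codeword_lengths`)
    have hun : ShadowUntouched s.mem s_10f3b2.mem := by v_untouched
    have hs := Codebook.site_field hL hcB hcin 8 8 (by decide) (by decide) rfl
    exact Vorbis.Spec.check_site hcs.shadow hun hs (by u_omega)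
  case call_inv =>
    refine Vorbis.abiInv_of ?_ ?_
    · rw [w_flags]
      simp only [X86.User.df_setStatus]
      exact w_df_10f393
    · rw [w_mxcsr]
      exact hmx
  case pre_10f4dd =>
    -- codebook_decode_scalar_raw's precondition (`BookPre`: the interface example of DecodeResidueTest.lean)
    have hun : ShadowUntouched s.mem s_10f4dd.mem := by v_untouched
    have hsame1 : Mem.SameExcept
        [⟨(g.e.reg .rsp).toNat - 848, (g.e.reg .rsp).toNat - 248⟩,
         ⟨(g.e.reg .rsp).toNat - 192, (g.e.reg .rsp).toNat - 176⟩,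
         ⟨(g.e.reg .rsp).toNat - 160, (g.e.reg .rsp).toNat - 156⟩,
         ⟨(g.e.reg .rdi).toNat + 48, (g.e.reg .rdi).toNat + 56⟩, ⟨(g.e.reg .rdi).toNat + 84, (g.e.reg .rdi).toNat + 96⟩,
         ⟨(g.e.reg .rdi).toNat + 136, (g.e.reg .rdi).toNat + 144⟩,
         ⟨(g.e.reg .rdi).toNat + 1484, (g.e.reg .rdi).toNat + 1749⟩,
         ⟨(g.e.reg .rdi).toNat + 1752, (g.e.reg .rdi).toNat + 1784⟩,
         ⟨g.TB.base + 8 * g.C, g.TB.base + g.TB.size⟩] s.mem s_10f4dd.mem := by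
      rw [w_mem]
      u_same
    -- COMMON for the memory at the call (a state with the registers of `s`)
    have hEall : Mem.EqOn (g.e.reg .rdi).toNat ((g.e.reg .rdi).toNat + 1808) s.mem s_10f4dd.mem := by
      u_memnorm
      u_eqon
    have hbN : Bits g.Blk g.len s_10f4dd.mem g.f := hbits.frame_fields (Bits.SameFields.of_same hEall)
    have hmuN : mu s_10f4dd.mem g.f = mu s.mem g.f := mu_frame_obj (by rw [ef]; omega) hEall
    have hfrfN : UInt64.ofNat (s_10f4dd.mem.readLE (g.e.reg .rsp - 184) 8) = g.e.reg .rdi := by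
      have h1 : s_10f4dd.mem.readLE (g.e.reg .rsp - 184) 8 = (g.e.reg .rdi).toNat := by
        rw [w_mem]
        u_read
      rw [h1]
      exact UInt64.ofNat_toNat
    have hcN : Common u₀ g { s with mem := s_10f4dd.mem } :=
      Common.carry_decode hent hc hm.rsp hm.rbp w_eq hm.inv hfrfN (hm9.trans hsame1) (Mem.EqOn.trans hm.untouched hun) hbN
        (by rw [hmuN]; exact hm.mu_le)
    have hvN : Real.VorbisOK g.len g.Blk s_10f4dd.mem g.f := hcN.point.vorbis
    have hi7N := (hcN.resAt hent).R7
    have ecN : Residue.cbk s_10f4dd.mem g.f g.r = c := by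
      rw [← hcdef]
      exact hcN.reads.cbk.trans hcs.reads.cbk.symm
    have etop : (s_10f4dd.reg .rsp).toNat + 8 = g.RA - 248 := by
      show _ = (g.e.reg .rsp).toNat - 248
      rw [w_rsp]
      u_omega
    have ersi : (s_10f4dd.reg .rsi).toNat = c := by
      rw [w_rsi]
      u_omega
    refine ⟨⟨⟨?_, hent.offText'⟩, ?_, ?_⟩, hpre.env.ok, ?_, ?_, ?_⟩
    · rw [etop]
      exact hcs.shadow.untouched hun
    · rw [w_rdi]
      exact hent.reader'
    · rw [w_rdi]
      exact hbN
    · rw [ersi]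
      exact ⟨_, hcB, hcin⟩
    · rw [ersi, ← ecN]
      exact hvN.config.books _ hi7N
    · rw [ersi, w_rdi, ← ecN]
      exact hent.bookApart hcN.same _ hi7N
  rotate_left 1
  · -- the fast path (0x10f3c2): `x = fast_huffman[k] ≥ 0`
    exact stop_chk46 Lay hLay μ hμ u₀ hcode h_load8 h_load1 h_load4 h_load2 h_scalar g hent cs pcount v s hm he he_rip
      he_retAddr he_ret_lt he_align he_code he_inv he_room he_top he_stack he_eq he_df he_mx he_sse hrip hc hch3 hr12 hloop hpre
      hob hobin hobst ef hr hs_rsp hs_rbp hs_r12 hs_r13 hs_rdi hdf hmx hsse hscal hwf hfr_f r1768 hm9 hcs hvs hL hbits hras hi7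
      c hs_r14 hcdef ecv hcbok hcB hcin hapart hcloc acc r1764 hacc hacclt s_10f36f w_has_10f36f s_10f36fr w_df_10f36f
      w_acc_10f36f w_has_10f374 s_10f38f k hklt hk hdf1 x hx hxlt hfh rfh rcl s_10f393r w_df_10f393 w_acc_10f393 w_has_10f3a0
      hbr_10f3a8 s_10f3b2r w_df_10f3b2 w_acc_10f3b2 s_10f3bf w_rip w_rdi w_rbx w_r13 w_rsp w_kept w_mem w_eq w_flags w_mxcsr
      w_zmm
  · -- after codebook_decode_scalar_raw (0x10f4e2)
    exact after_scalar_raw Lay hLay μ hμ u₀ hcode g v s hm he_align he_room he_top he_stack hobin hobst ef hs_rsp hs_rbp hs_r12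
      hs_r13 hs_rdi hdf hmx hsse hwf c hs_r14 ecv hcloc acc hacclt s_10f36f x hxlt s_10f4dd w_rsi_10f4dd w_rdi_10f4dd
      w_rbx_10f4dd w_r13_10f4dd w_rsp_10f4dd w_rax_10f4dd w_kept_10f4dd w_mem_10f4dd w_mxcsr_10f4dd w_zmm_10f4dd s_10f4ddr w_rip
      w_rsp w_kept w_rbx w_r13 w_same w_code w_inv w_post

/-- **Segment 7, part B** (0x10f36f … 0x10f40d; C 2218, DECODE_RAW of `DECODE(q,f,c)`): `f->acc`, the fast table
`c->fast_huffman[acc & 1023]`; a negative entry: `codebook_decode_scalar_raw(f, c)`; else the inline path: `codeword_lengths[x]`,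
`acc >>= len`, `valid_bits -= len`, and `valid_bits < 0` ⇒ `valid_bits = 0`, result −1. From `At17Mid1` to `At17Mid2` (the result
in the scratch slot `[rbp−0xb8]`). The walk is STAGED (`until [chk44]`, `[chk46]`, `[chk47]`, `[chk48]`): at each stop the
registers are rewritten to numbers, so that the next loads are resolved through the stack writes. This theorem is the set-up
and the first stage; the later stages are the lemmas above. -/
theorem seg_b (Lay : Layout) (hLay : Lay.hi = 0x1000000) (μ : Microarch) (hμ : UserX.MicroOK μ) (u₀ : State)
    (hcode : HasCodeNat Lay u₀ Vorbis.L.decode_residue.entry Vorbis.Code.code_decode_residue.nat Vorbis.L.decode_residue.size)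
    (h_load8 : Asan.SmallCheck Lay μ Vorbis.WayInv (Vorbis.CodeOK u₀) [.rax, .rcx, .rdx] 8 Vorbis.L.__asan_load8_noabort.entry)
    (h_load1 : Asan.SmallCheck Lay μ Vorbis.WayInv (Vorbis.CodeOK u₀) [.rax, .rdx] 1 Vorbis.L.__asan_load1_noabort.entry)
    (h_load4 : Asan.SmallCheck Lay μ Vorbis.WayInv (Vorbis.CodeOK u₀) [.rax, .rcx, .rdx] 4 Vorbis.L.__asan_load4_noabort.entry)
    (h_load2 : Asan.SmallCheck Lay μ Vorbis.WayInv (Vorbis.CodeOK u₀) [.rax, .rcx, .rdx] 2 Vorbis.L.__asan_load2_noabort.entry)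
    (h_scalar : ∀ (others : List Obj) (frames : List (Nat × FrameLayout)) (Blk : Block → Prop) (len : Nat), Calls Lay μ Vorbis.WayInv (Vorbis.conv u₀) Vorbis.L.codebook_decode_scalar_raw.entry (Vorbis.Spec.codebook_decode_scalar_raw.spec others frames Blk len))
    (g : G) (hent : Entered u₀ g) (cs pcount : Nat) (v : State) (hat : At17 u₀ g cs pcount v)
    (s : State) (hm : At17Mid1 u₀ g v s) :
    ReachVia Lay μ WayInv s (fun s' => At17Mid2 u₀ g v s') := by
  have he := hent.entry
  v_entry he
  obtain ⟨hrip, hc, hch3, hr12, hloop⟩ := hat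
  have hpre := hent.pre
  have hob : g.Blk (objBlock g.f) := hent.vorbis.obj
  have hobin := hpre.env.ok.inside _ hob
  have hobst := hpre.free.offStack _ hob
  simp only [vblock, voff] at hobin hobst
  have ef : g.f = (g.e.reg .rdi).toNat := rfl
  rw [ef] at hobin hobst
  have hr : g.e.reg .rdi = addr g.f := eq_addr _ _ rfl
  have hs_rsp : s.reg .rsp = g.e.reg .rsp - 248 := hm.rsp
  have hs_rbp : s.reg .rbp = g.e.reg .rsp - 8 := hm.rbp
  have hs_r12 : s.reg .r12 = UInt64.ofNat g.r := hm.r12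
  have hs_r13 : s.reg .r13 = g.e.reg .rdi := hm.r13
  have hs_r14 := hm.r14
  have hs_rdi := hm.rdi
  have w_rip := hm.rip
  have w_eq : Mem.EqOn Vorbis.L.textLo Vorbis.L.textHi u₀.mem s.mem := hm.code
  have hdf : s.flags .df = false := (show abiInv _ from hm.inv).1
  have hmx : s.mxcsr &&& 0x1F80 = 0x1F80 := (show abiInv _ from hm.inv).2
  have hsse := Vorbis.sseOK_of_abiInv hm.inv
  have hscal := h_scalar g.others' g.frames' g.Blk g.len
  have hwf := (hent.reader.obj.where_ hpre.shadow.inv hpre.shadow.offText (by decide)).1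
  rw [ef] at hwf
  have hfr_f := hm.fr_f
  have r1764 : s.mem.readLE (g.e.reg .rdi + 1764) 4 = s.mem.u32 (g.f + 1764) := by
    rw [hr]
    simp only [vfield, vacc, voff]
  have r1768 : s.mem.readLE (g.e.reg .rdi + 1768) 4 = s.mem.u32 (g.f + 1768) := by
    rw [hr]
    simp only [vfield, vacc, voff]
  -- COMMON at the present state, and the class book there
  have hm9 : Mem.SameExcept
      [⟨(g.e.reg .rsp).toNat - 848, (g.e.reg .rsp).toNat - 248⟩,
       ⟨(g.e.reg .rsp).toNat - 192, (g.e.reg .rsp).toNat - 176⟩,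
       ⟨(g.e.reg .rsp).toNat - 160, (g.e.reg .rsp).toNat - 156⟩,
       ⟨(g.e.reg .rdi).toNat + 48, (g.e.reg .rdi).toNat + 56⟩, ⟨(g.e.reg .rdi).toNat + 84, (g.e.reg .rdi).toNat + 96⟩,
       ⟨(g.e.reg .rdi).toNat + 136, (g.e.reg .rdi).toNat + 144⟩, ⟨(g.e.reg .rdi).toNat + 1484, (g.e.reg .rdi).toNat + 1749⟩,
       ⟨(g.e.reg .rdi).toNat + 1752, (g.e.reg .rdi).toNat + 1784⟩,
       ⟨g.TB.base + 8 * g.C, g.TB.base + g.TB.size⟩] v.mem s.mem := by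
    apply hm.same.mono
    intro w hw a h1 h2
    exact ⟨w, List.mem_append_left [_] hw, h1, h2⟩
  have hcs : Common u₀ g s :=
    Common.carry_decode hent hc hm.rsp hm.rbp hm.code hm.inv hm.fr_f hm9 hm.untouched hm.bits hm.mu_le
  have hvs : Real.VorbisOK g.len g.Blk s.mem g.f := hcs.point.vorbis
  have hL : BlkLive g.Blk g.Live' := hcs.point.env.live
  have hbits : Bits g.Blk g.len s.mem g.f := hm.bits
  have hras := hcs.resAt hent
  have hi7 := hras.R7
  obtain ⟨c, hcdef⟩ : ∃ c, Residue.cbk s.mem g.f g.r = c := ⟨_, rfl⟩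
  have ecv : Residue.cbk v.mem g.f g.r = c := by
    rw [← hcdef]
    exact hc.reads.cbk.trans hcs.reads.cbk.symm
  rw [ecv] at hs_r14
  have hcbok : CodebookOK g.Blk s.mem c := by
    rw [← hcdef]
    exact hvs.config.books _ hi7
  have hcB := hvs.config.cb0.F2
  have hcin : (codebooksBlock s.mem g.f).contains c Off.sizeof.Codebook := by
    rw [← hcdef]
    exact hvs.config.cb0.cb_in _ hi7
  have hcst := hpre.free.offStack _ hcB
  have hcbi := hpre.env.ok.inside _ hcB
  have hapart : BookApart s.mem g.f c := by
    rw [← hcdef]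
    exact hent.bookApart hcs.same _ hi7
  have hcf := hapart.book
  have hcin' := hcin
  simp only [vblock, voff] at hcin' hcst hcbi hcf
  rw [ef] at hcf
  have hcloc : 0x100000 ≤ c ∧ c + 2120 ≤ 0xC00000 ∧ (c + 2120 ≤ 0x700000 ∨ 0x800000 ≤ c) ∧
      (c + 2120 ≤ (g.e.reg .rdi).toNat ∨ (g.e.reg .rdi).toNat + 1808 ≤ c) := by
    omega
  clear hcin' hcst hcbi hcf
  -- the accumulator and the index of the fast table
  obtain ⟨acc, hacc⟩ : ∃ acc, s.mem.u32 (g.f + 1764) = acc := ⟨_, rfl⟩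
  have hacclt : acc < 2 ^ 32 := by
    rw [← hacc]
    exact Mem.u32_lt _ _
  rw [hacc] at r1764
  have hklt := Vorbis.and_1023_lt acc
  u_walk hcode [hμ.vendor] until [Vorbis.L.decode_residue.chk44] span [Vorbis.L.textLo, Vorbis.L.textHi] side (v_side)
  case check_10f36f =>
    -- 0x10f36f, load4 [f + 1764] (`f->acc`)
    have hun : ShadowUntouched s.mem s_10f36f.mem := by v_untouched
    have hs := hbits.site_field hL 1764 4 (by omega) (by omega) rfl
    exact Vorbis.Spec.check_site hcs.shadow hun hs (by u_omega)
  exact stop_chk44 Lay hLay μ hμ u₀ hcode h_load8 h_load1 h_load4 h_load2 h_scalar g hent cs pcount v s hm he he_rip he_retAddr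
    he_ret_lt he_align he_code he_inv he_room he_top he_stack he_eq he_df he_mx he_sse hrip hc hch3 hr12 hloop hpre hob hobin
    hobst ef hr hs_rsp hs_rbp hs_r12 hs_r13 hs_rdi hdf hmx hsse hscal hwf hfr_f r1768 hm9 hcs hvs hL hbits hras hi7 c hs_r14
    hcdef ecv hcbok hcB hcin hapart hcloc acc r1764 hacc hacclt hklt s_10f36f w_has_10f36f s_10f36fr w_df_10f36f w_acc_10f36f
    w_has_10f374 s_10f38f w_rip w_rdi w_rbx w_r13 w_rsp w_kept w_mem w_eq w_flags w_mxcsr w_zmm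

end Vorbis.Spec.decode_residue_7b
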